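-- pv_equiv track=rewrite | github.com/leemhyungyu/Baekjoon-Programmers | Programmers/Lv2/석유 시추.py | solution
-- ===== SOURCE A (Python) =====
-- from collections import deque
--
-- dxdy = [(1, 0), (-1, 0), (0, 1), (0, -1)]
--
-- def solution(land):
--     n = len(land)
--     m = len(land[0])
--     visited = [[False for _ in range(m)] for  _ in range(n)]
--     result = [0 for _ in range(m)]
--     answer = 0
--
--     def bfs(start):
--         count = 0
--         queue = deque([start])
--         min_y, max_y = start[1], start[1]
--
--         visited[start[0]][start[1]] = True
--         while queue:
--             x, y = queue.popleft()
--             min_y = min(min_y, y)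
--             max_y = max(max_y, y)
--
--             count += 1
--             for i in dxdy:
--                 nx = i[0] + x
--                 ny = i[1] + y
--
--                 if 0 <= nx < n and 0 <= ny < m:
--                     if visited[nx][ny]: continue
--                     if land[nx][ny] == 0: continue
--                     queue.append((nx, ny))
--                     visited[nx][ny] = True
--
--         for i in range(min_y, max_y + 1):
--             result[i] += count
--         return count
--
--     for y in range(m):
--         for x in range(n):
--             if visited[x][y] or land[x][y] == 0: continue
--             bfs((x, y))
--
--     answer = max(result)
--
--
--     return answer
-- ===== SOURCE B (Python) =====
-- def solution(land):
--     n = len(land)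
--     m = len(land[0])
--
--     parent = {}
--     for x in range(n):
--         for y in range(m):
--             if land[x][y] != 0:
--                 parent[(x, y)] = (x, y)
--
--     def find(c):
--         while parent[c] != c:
--             c = parent[c]
--         return c
--
--     for x in range(n):
--         for y in range(m):
--             if land[x][y] == 0:
--                 continue
--             for (nx, ny) in ((x + 1, y), (x, y + 1)):
--                 if nx < n and ny < m and land[nx][ny] != 0:
--                     ra = find((x, y))
--                     rb = find((nx, ny))
--                     if ra != rb:
--                         if rb < ra:
--                             ra, rb = rb, ra
--                         parent[rb] = ra
--
--     stats = {}
--     for x in range(n):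
--         for y in range(m):
--             if land[x][y] != 0:
--                 r = find((x, y))
--                 if r in stats:
--                     cnt, lo, hi = stats[r]
--                     stats[r] = (cnt + 1, min(lo, y), max(hi, y))
--                 else:
--                     stats[r] = (1, y, y)
--
--     return max(sum(cnt for (cnt, lo, hi) in stats.values() if lo <= col <= hi)
--                for col in range(m))
-- ===== Notes on version B (the rewrite author's own statement) =====
-- stated objective: alternative
-- what changed: A's per-component BFS flood fill (deque + boolean visited matrix + in-place column-range increments per component) is replaced by a disjoint-set union-find: one pass unions every nonzero cell with its right/down nonzero neighbours (roots kept as the raster-smallest cell), a second pass groups cells by final root into per-component (size, min column, max column) triples, and the answer is the max over columns of the summed sizes of components whose span covers the column.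
-- outside the precondition, e.g. on solution([]): A raises IndexError, B raises IndexError; on solution([[]]): A raises ValueError, B raises ValueError; on solution([[1, 1], [1]]): A raises IndexError, B raises IndexError
import Mathlib
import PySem

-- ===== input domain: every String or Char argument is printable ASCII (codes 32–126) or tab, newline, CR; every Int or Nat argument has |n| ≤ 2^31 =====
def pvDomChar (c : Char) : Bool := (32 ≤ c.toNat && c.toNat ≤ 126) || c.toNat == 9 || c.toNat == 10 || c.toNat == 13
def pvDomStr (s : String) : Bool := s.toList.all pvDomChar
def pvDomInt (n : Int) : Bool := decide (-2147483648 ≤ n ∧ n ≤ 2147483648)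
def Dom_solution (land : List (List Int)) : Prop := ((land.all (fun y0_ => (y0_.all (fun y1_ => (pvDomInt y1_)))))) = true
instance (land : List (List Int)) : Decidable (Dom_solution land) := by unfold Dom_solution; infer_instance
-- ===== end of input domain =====

-- B replaces A's per-component BFS flood fill by a disjoint-set (union-find) pass over the
-- whole grid (union each nonzero cell with its right/down nonzero neighbour, root = smaller
-- cell in raster order), then groups cells by final root to get each component's size and
-- column span (objective: alternative; same answer, different algorithm).

-- land[x][y] (total form; inside Pre_ every access made by either program is in range)
def cellD (land : List (List Int)) (x y : Int) : Int :=
  PySem.List.pyGetD (PySem.List.pyGetD land x []) y 0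

-- ===== PORT A =====
def pvDxdy : List (Int × Int) := [(1, 0), (-1, 0), (0, 1), (0, -1)]

def pvVisGet (vis : List (List Bool)) (x y : Int) : Bool :=
  PySem.List.pyGetD (PySem.List.pyGetD vis x []) y false

def pvVisSet (vis : List (List Bool)) (x y : Int) : List (List Bool) :=
  PySem.List.pySetD vis x (PySem.List.pySetD (PySem.List.pyGetD vis x []) y true)

-- the `for i in dxdy` body of A's bfs: appends unvisited nonzero in-bounds neighbours and marks them
def pvExpand (land : List (List Int)) (n m x y : Int)
    (st : List (Int × Int) × List (List Bool)) : List (Int × Int) × List (List Bool) :=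
  pvDxdy.foldl (fun acc i =>
    let nx := i.1 + x
    let ny := i.2 + y
    if 0 ≤ nx ∧ nx < n ∧ 0 ≤ ny ∧ ny < m then
      if pvVisGet acc.2 nx ny = true then acc
      else if cellD land nx ny = 0 then acc
      else (acc.1 ++ [(nx, ny)], pvVisSet acc.2 nx ny)
    else acc) st

-- A's `while queue` loop (fuel only makes the recursion structural; it is provably never exhausted)
def pvBfsLoop (land : List (List Int)) (n m : Int) :
    Nat → List (Int × Int) → List (List Bool) → Int → Int → Int →
    List (List Bool) × Int × Int × Int
  | 0, _, vis, count, lo, hi => (vis, count, lo, hi)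
  | _ + 1, [], vis, count, lo, hi => (vis, count, lo, hi)
  | fuel + 1, c :: rest, vis, count, lo, hi =>
    let lo' := min lo c.2
    let hi' := max hi c.2
    let st := pvExpand land n m c.1 c.2 (rest, vis)
    pvBfsLoop land n m fuel st.1 st.2 (count + 1) lo' hi'

-- A's bfs(start): runs the loop, then adds count to result[min_y..max_y]
def pvBfs (land : List (List Int)) (n m : Int) (vis : List (List Bool)) (result : List Int)
    (s : Int × Int) : List (List Bool) × List Int :=
  let vis0 := pvVisSet vis s.1 s.2
  let r := pvBfsLoop land n m (n.toNat * m.toNat + 1) [s] vis0 0 s.2 s.2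
  let result' := (PySem.List.pyRange r.2.2.1 (r.2.2.2 + 1) 1).foldl
    (fun res i => PySem.List.pySetD res i (PySem.List.pyGetD res i 0 + r.2.1)) result
  (r.1, result')

def solution (land : List (List Int)) : Int :=
  let n : Int := PySem.List.len land
  let m : Int := PySem.List.len (PySem.List.pyGetD land 0 [])
  let vis : List (List Bool) :=
    (PySem.List.pyRange 0 n 1).map (fun _ => (PySem.List.pyRange 0 m 1).map (fun _ => false))
  let result : List Int := (PySem.List.pyRange 0 m 1).map (fun _ => (0 : Int))
  let fin := (PySem.List.pyRange 0 m 1).foldl (fun st y =>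
    (PySem.List.pyRange 0 n 1).foldl (fun (st : List (List Bool) × List Int) x =>
      if pvVisGet st.1 x y = true then st
      else if cellD land x y = 0 then st
      else pvBfs land n m st.1 st.2 (x, y)) st) (vis, result)
  (PySem.List.max? fin.2 (fun v => v)).getD 0

-- ===== PORT B =====
-- Python tuple `<` on pairs of ints (lexicographic)
def pvLtB (a b : Int × Int) : Bool := a.1 < b.1 || (a.1 == b.1 && a.2 < b.2)

-- B's find: follow parent pointers until a fixpoint.  Python's `while` is unbounded; the
-- fuel (grid size + 1) is provably enough because every parent link strictly decreases the
-- cell in raster order.  (A missing key would be a KeyError in Python; under B's invariant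
-- every chain stays inside the dict, so the `none` branch is never taken.)
def pvFind (P : PySem.Dict (Int × Int) (Int × Int)) : Nat → (Int × Int) → (Int × Int)
  | 0, c => c
  | fuel + 1, c =>
    match P.get? c with
    | some d => if d = c then c else pvFind P fuel d
    | none => c

-- B's first pass: parent[(x, y)] = (x, y) for every nonzero cell
def pvParent0 (land : List (List Int)) (n m : Int) : PySem.Dict (Int × Int) (Int × Int) :=
  (PySem.List.pyRange 0 n 1).foldl (fun P x =>
    (PySem.List.pyRange 0 m 1).foldl (fun P y =>
      if cellD land x y ≠ 0 then P.insert (x, y) (x, y) else P) P) PySem.Dict.empty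

-- B's union body for one nonzero cell: union with the right and down nonzero neighbours
def pvUnion (land : List (List Int)) (n m : Int) (fuel : Nat)
    (P : PySem.Dict (Int × Int) (Int × Int)) (x y : Int) :
    PySem.Dict (Int × Int) (Int × Int) :=
  [(x + 1, y), (x, y + 1)].foldl (fun P c =>
    if c.1 < n ∧ c.2 < m ∧ cellD land c.1 c.2 ≠ 0 then
      let ra := pvFind P fuel (x, y)
      let rb := pvFind P fuel c
      if ra = rb then P
      else if pvLtB rb ra then P.insert ra rb else P.insert rb ra
    else P) P

-- B's third pass: per-root (count, min column, max column)
def pvStats (land : List (List Int)) (n m : Int) (fuel : Nat)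
    (P : PySem.Dict (Int × Int) (Int × Int)) : PySem.Dict (Int × Int) (Int × Int × Int) :=
  (PySem.List.pyRange 0 n 1).foldl (fun s x =>
    (PySem.List.pyRange 0 m 1).foldl (fun s y =>
      if cellD land x y ≠ 0 then
        let r := pvFind P fuel (x, y)
        match s.get? r with
        | some t => s.insert r (t.1 + 1, min t.2.1 y, max t.2.2 y)
        | none => s.insert r (1, y, y)
      else s) s) PySem.Dict.empty

def solution_alt (land : List (List Int)) : Int :=
  let n : Int := PySem.List.len land
  let m : Int := PySem.List.len (PySem.List.pyGetD land 0 [])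
  let fuel : Nat := n.toNat * m.toNat + 1
  let P0 := pvParent0 land n m
  let P := (PySem.List.pyRange 0 n 1).foldl (fun P x =>
    (PySem.List.pyRange 0 m 1).foldl (fun P y =>
      if cellD land x y = 0 then P else pvUnion land n m fuel P x y) P) P0
  let stats := pvStats land n m fuel P
  (PySem.List.max? ((PySem.List.pyRange 0 m 1).map (fun col =>
    ((stats.values.filter (fun t => decide (t.2.1 ≤ col ∧ col ≤ t.2.2))).map
      (fun t => t.1)).sum)) (fun v => v)).getD 0

-- ===== PRECONDITION & SPEC =====
-- Pre_ excludes exactly the inputs where Python A raises: empty land (land[0] IndexError),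
-- an empty first row (max of an empty result ValueError), and rows shorter than row 0
-- (land[x][y] IndexError during the column sweep). Rows LONGER than row 0 are fine for A.
def Pre_solution (land : List (List Int)) : Prop :=
  land ≠ [] ∧ 0 < (land.headD []).length ∧ ∀ row ∈ land, (land.headD []).length ≤ row.length

instance (land : List (List Int)) : Decidable (Pre_solution land) := by
  unfold Pre_solution; infer_instance

def pvWitness_solution : List (List Int) := [[1, 0], [0, 5]]

def Spec_solution (land : List (List Int)) (out : Int) : Prop := out = solution_alt land
instance (land : List (List Int)) (out : Int) : Decidable (Spec_solution land out) := by
  unfold Spec_solution; infer_instance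

-- ===== CLAIM (what is proved, stated in full; the proofs are below) =====
def Claim_equal_solution : Prop :=
  ∀ (land : List (List Int)), Dom_solution land → Pre_solution land →
    Spec_solution land (solution land)

-- ===== LEMMAS AND PROOFS =====

-- the 4-neighbourhood of a cell, in A's dxdy order
def pvNbrs (c : Int × Int) : List (Int × Int) := pvDxdy.map (fun i => (i.1 + c.1, i.2 + c.2))

-- an in-bounds cell / an in-bounds nonzero cell
def pvInG (n m : Int) (c : Int × Int) : Prop :=
  0 ≤ c.1 ∧ c.1 < n ∧ 0 ≤ c.2 ∧ c.2 < m

def pvOpen (land : List (List Int)) (n m : Int) (c : Int × Int) : Prop :=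
  pvInG n m c ∧ cellD land c.1 c.2 ≠ 0

-- cells reachable from s through open cells not in V
inductive pvReach (land : List (List Int)) (n m : Int) (V : Int × Int → Prop) (s : Int × Int) :
    Int × Int → Prop
  | base : pvReach land n m V s s
  | step {c d : Int × Int} : pvReach land n m V s c → d ∈ pvNbrs c →
      pvOpen land n m d → ¬ V d → pvReach land n m V s d

-- unrestricted reachability (V = ∅): the connectivity both programs compute
def pvR (land : List (List Int)) (n m : Int) (s c : Int × Int) : Prop :=
  pvReach land n m (fun _ => False) s c

-- the grid of in-bounds cells
def pvGrid (n m : Int) : Finset (Int × Int) :=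
  ((Finset.range n.toNat) ×ˢ (Finset.range m.toNat)).image
    (fun p => ((p.1 : Int), (p.2 : Int)))

theorem mem_pvGrid (n m : Int) (c : Int × Int) : c ∈ pvGrid n m ↔ pvInG n m c := by
  simp only [pvGrid, Finset.mem_image, Finset.mem_product, Finset.mem_range, pvInG]
  constructor
  · rintro ⟨⟨a, b⟩, ⟨ha, hb⟩, rfl⟩
    simp only []
    omega
  · rintro ⟨h1, h2, h3, h4⟩
    refine ⟨(c.1.toNat, c.2.toNat), ⟨by omega, by omega⟩, ?_⟩
    simp only []
    rw [Int.toNat_of_nonneg h1, Int.toNat_of_nonneg h3]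

theorem card_pvGrid (n m : Int) : (pvGrid n m).card = n.toNat * m.toNat := by
  unfold pvGrid
  rw [Finset.card_image_of_injective]
  · simp
  · intro a b hab
    simp only [Prod.mk.injEq] at hab
    exact Prod.ext (by exact_mod_cast hab.1) (by exact_mod_cast hab.2)

-- visited-matrix shape
def pvShape (n m : Int) (vis : List (List Bool)) : Prop :=
  vis.length = n.toNat ∧ ∀ row ∈ vis, row.length = m.toNat

theorem pvRow_eq (n m : Int) (vis : List (List Bool)) (x : Int)
    (hs : pvShape n m vis) (h0 : 0 ≤ x) (h1 : x < n) :
    PySem.List.pyGetD vis x [] =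
      vis[x.toNat]'(by obtain ⟨hL, _⟩ := hs; omega) := by
  exact PySem.List.pyGetD_eq_getElem vis [] h0 (by obtain ⟨hL, _⟩ := hs; omega)

theorem pvVisGet_eq (n m : Int) (vis : List (List Bool)) (a b : Int)
    (hs : pvShape n m vis) (w1 : 0 ≤ a) (w2 : a < n) (w3 : 0 ≤ b) (w4 : b < m) :
    pvVisGet vis a b =
      (vis[a.toNat]'(by obtain ⟨hL, _⟩ := hs; omega)).getD b.toNat false := by
  obtain ⟨hL, hR⟩ := hs
  unfold pvVisGet
  rw [pvRow_eq n m vis a ⟨hL, hR⟩ w1 w2]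
  have hrow : (vis[a.toNat]'(by omega)).length = m.toNat :=
    hR _ (vis.getElem_mem _)
  rw [PySem.List.pyGetD_eq_getElem _ false w3 (by omega)]
  rw [List.getD_eq_getElem _ _ (by omega)]

theorem pvShape_visSet (n m : Int) (vis : List (List Bool)) (x y : Int)
    (hs : pvShape n m vis) (u1 : 0 ≤ x) (u2 : x < n) (u3 : 0 ≤ y) (_u4 : y < m) :
    pvShape n m (pvVisSet vis x y) := by
  obtain ⟨hL, hR⟩ := hs
  unfold pvVisSet
  rw [PySem.List.pySetD_of_nonneg _ _ u1, PySem.List.pySetD_of_nonneg _ _ u3]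
  constructor
  · simpa using hL
  · intro row hrow
    rcases List.mem_or_eq_of_mem_set hrow with h | h
    · exact hR _ h
    · subst h
      rw [pvRow_eq n m vis x ⟨hL, hR⟩ u1 u2]
      simpa using hR _ (vis.getElem_mem _)

theorem pvVisGet_visSet (n m : Int) (vis : List (List Bool)) (x y a b : Int)
    (hs : pvShape n m vis) (u1 : 0 ≤ x) (u2 : x < n) (u3 : 0 ≤ y) (u4 : y < m)
    (w1 : 0 ≤ a) (w2 : a < n) (w3 : 0 ≤ b) (w4 : b < m) :
    pvVisGet (pvVisSet vis x y) a b =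
      if a = x ∧ b = y then true else pvVisGet vis a b := by
  have hs' := pvShape_visSet n m vis x y hs u1 u2 u3 u4
  rw [pvVisGet_eq n m _ a b hs' w1 w2 w3 w4,
      pvVisGet_eq n m vis a b hs w1 w2 w3 w4]
  obtain ⟨hL, hR⟩ := hs
  have hax : a.toNat < vis.length := by omega
  have hxx : x.toNat < vis.length := by omega
  have hset : pvVisSet vis x y =
      vis.set x.toNat ((vis[x.toNat]'hxx).set y.toNat true) := by
    unfold pvVisSet
    rw [PySem.List.pySetD_of_nonneg _ _ u1, PySem.List.pySetD_of_nonneg _ _ u3,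
        pvRow_eq n m vis x ⟨hL, hR⟩ u1 u2]
  by_cases hxa : a = x
  · subst hxa
    have hrow1 : (pvVisSet vis a y)[a.toNat]'(by
        obtain ⟨hL', _⟩ := hs'; omega) =
        (vis[a.toNat]'hax).set y.toNat true := by
      simp only [hset, List.getElem_set]
      simp
    rw [hrow1]
    have hrow : (vis[a.toNat]'hax).length = m.toNat := hR _ (vis.getElem_mem _)
    by_cases hby : b = y
    · subst hby
      simp only [and_self, if_true]
      rw [List.getD_eq_getElem _ _ (by simp only [List.length_set]; omega)]
      rw [List.getElem_set]
      simp
    · have hbn : b.toNat ≠ y.toNat := by omega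
      simp only [hby, and_false, if_false]
      rw [List.getD_eq_getElem _ _ (by simp only [List.length_set]; omega),
          List.getD_eq_getElem _ _ (by omega)]
      rw [List.getElem_set]
      simp [Ne.symm hbn]
  · have han : x.toNat ≠ a.toNat := by omega
    have hrow2 : (pvVisSet vis x y)[a.toNat]'(by
        obtain ⟨hL', _⟩ := hs'; omega) = vis[a.toNat]'hax := by
      simp only [hset, List.getElem_set]
      simp [han]
    rw [hrow2]
    simp [hxa]

def pvStep (land : List (List Int)) (n m x y : Int)
    (acc : List (Int × Int) × List (List Bool)) (i : Int × Int) :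
    List (Int × Int) × List (List Bool) :=
  let nx := i.1 + x
  let ny := i.2 + y
  if 0 ≤ nx ∧ nx < n ∧ 0 ≤ ny ∧ ny < m then
    if pvVisGet acc.2 nx ny = true then acc
    else if cellD land nx ny = 0 then acc
    else (acc.1 ++ [(nx, ny)], pvVisSet acc.2 nx ny)
  else acc

theorem pvExpand_eq (land : List (List Int)) (n m x y : Int)
    (st : List (Int × Int) × List (List Bool)) :
    pvExpand land n m x y st = pvDxdy.foldl (pvStep land n m x y) st := rfl

theorem pvExpand_go (land : List (List Int)) (n m x y : Int)
    (ds : List (Int × Int)) (q0 : List (Int × Int)) (vis : List (List Bool))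
    (hs : pvShape n m vis) :
    ∃ new : List (Int × Int),
      ds.foldl (pvStep land n m x y) (q0, vis) =
        (q0 ++ new, (ds.foldl (pvStep land n m x y) (q0, vis)).2) ∧
      pvShape n m (ds.foldl (pvStep land n m x y) (q0, vis)).2 ∧
      new.Nodup ∧
      (∀ c ∈ new, (∃ i ∈ ds, c = (i.1 + x, i.2 + y)) ∧ pvOpen land n m c ∧
        pvVisGet vis c.1 c.2 = false) ∧
      (∀ a b : Int, 0 ≤ a → a < n → 0 ≤ b → b < m →
        (pvVisGet (ds.foldl (pvStep land n m x y) (q0, vis)).2 a b = true ↔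
          pvVisGet vis a b = true ∨ (a, b) ∈ new)) ∧
      (∀ i ∈ ds, pvOpen land n m (i.1 + x, i.2 + y) →
        pvVisGet vis (i.1 + x) (i.2 + y) = true ∨ (i.1 + x, i.2 + y) ∈ new) := by
  induction ds generalizing q0 vis with
  | nil =>
    exact ⟨[], by simp, hs, by simp, by simp, fun a b _ _ _ _ => by simp,
      by simp⟩
  | cons i ds ih =>
    simp only [List.foldl_cons]
    by_cases hb : 0 ≤ i.1 + x ∧ i.1 + x < n ∧ 0 ≤ i.2 + y ∧ i.2 + y < m
    · by_cases hv : pvVisGet vis (i.1 + x) (i.2 + y) = true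
      · have hstep : pvStep land n m x y (q0, vis) i = (q0, vis) := by
          unfold pvStep
          simp [hb, hv]
        rw [hstep]
        obtain ⟨new, e1, e2, e3, e4, e5, e6⟩ := ih q0 vis hs
        refine ⟨new, e1, e2, e3, ?_, e5, ?_⟩
        · intro c hc
          obtain ⟨⟨j, hj, hcj⟩, h2, h3⟩ := e4 c hc
          exact ⟨⟨j, List.mem_cons_of_mem _ hj, hcj⟩, h2, h3⟩
        · intro j hj hop
          rcases List.mem_cons.mp hj with rfl | hj'
          · exact Or.inl hv
          · exact e6 j hj' hop
      · by_cases hz : cellD land (i.1 + x) (i.2 + y) = 0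
        · have hstep : pvStep land n m x y (q0, vis) i = (q0, vis) := by
            unfold pvStep
            simp [hb, hv, hz]
          rw [hstep]
          obtain ⟨new, e1, e2, e3, e4, e5, e6⟩ := ih q0 vis hs
          refine ⟨new, e1, e2, e3, ?_, e5, ?_⟩
          · intro c hc
            obtain ⟨⟨j, hj, hcj⟩, h2, h3⟩ := e4 c hc
            exact ⟨⟨j, List.mem_cons_of_mem _ hj, hcj⟩, h2, h3⟩
          · intro j hj hop
            rcases List.mem_cons.mp hj with rfl | hj'
            · exact absurd hz (by simpa using hop.2)
            · exact e6 j hj' hop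
        · obtain ⟨b1, b2, b3, b4⟩ := hb
          have hstep : pvStep land n m x y (q0, vis) i =
              (q0 ++ [(i.1 + x, i.2 + y)], pvVisSet vis (i.1 + x) (i.2 + y)) := by
            unfold pvStep
            simp [b1, b2, b3, b4, hv, hz]
          rw [hstep]
          have hs' := pvShape_visSet n m vis _ _ hs b1 b2 b3 b4
          obtain ⟨new, e1, e2, e3, e4, e5, e6⟩ :=
            ih (q0 ++ [(i.1 + x, i.2 + y)]) (pvVisSet vis (i.1 + x) (i.2 + y)) hs'
          have hd : ∀ c ∈ new, c ≠ (i.1 + x, i.2 + y) := by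
            intro c hc hcd
            obtain ⟨_, hop, hvz⟩ := e4 c hc
            rw [hcd] at hvz
            rw [pvVisGet_visSet n m vis _ _ _ _ hs b1 b2 b3 b4 b1 b2 b3 b4] at hvz
            simp at hvz
          refine ⟨(i.1 + x, i.2 + y) :: new, ?_, e2, ?_, ?_, ?_, ?_⟩
          · rw [e1]
            simp
          · exact List.nodup_cons.mpr ⟨fun h => hd _ h rfl, e3⟩
          · intro c hc
            rcases List.mem_cons.mp hc with rfl | hc'
            · refine ⟨⟨i, List.mem_cons_self .., rfl⟩, ⟨⟨b1, b2, b3, b4⟩, hz⟩, ?_⟩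
              simpa using hv
            · obtain ⟨⟨j, hj, hcj⟩, hop, hvz⟩ := e4 c hc'
              obtain ⟨o1, o2, o3, o4⟩ := hop.1
              rw [pvVisGet_visSet n m vis _ _ _ _ hs b1 b2 b3 b4 o1 o2 o3 o4] at hvz
              refine ⟨⟨j, List.mem_cons_of_mem _ hj, hcj⟩, hop, ?_⟩
              by_cases hcd : c.1 = i.1 + x ∧ c.2 = i.2 + y
              · rw [if_pos hcd] at hvz
                cases hvz
              · rwa [if_neg hcd] at hvz
          · intro a b ha1 ha2 hb1 hb2
            rw [e5 a b ha1 ha2 hb1 hb2]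
            rw [pvVisGet_visSet n m vis _ _ _ _ hs b1 b2 b3 b4 ha1 ha2 hb1 hb2]
            by_cases hab : a = i.1 + x ∧ b = i.2 + y
            · simp [hab.1, hab.2]
            · have : ((a, b) : Int × Int) ≠ (i.1 + x, i.2 + y) := by
                intro h
                exact hab ⟨congrArg Prod.fst h, congrArg Prod.snd h⟩
              simp [hab, this]
          · intro j hj hop
            rcases List.mem_cons.mp hj with rfl | hj'
            · exact Or.inr (List.mem_cons_self ..)
            · rcases e6 j hj' hop with hvt | hmem
              · obtain ⟨o1, o2, o3, o4⟩ := hop.1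
                rw [pvVisGet_visSet n m vis _ _ _ _ hs b1 b2 b3 b4 o1 o2 o3 o4] at hvt
                by_cases hjd : j.1 + x = i.1 + x ∧ j.2 + y = i.2 + y
                · refine Or.inr ?_
                  have hpair : ((j.1 + x, j.2 + y) : Int × Int) =
                      (i.1 + x, i.2 + y) := by rw [hjd.1, hjd.2]
                  rw [hpair]
                  exact List.mem_cons_self ..
                · rw [if_neg hjd] at hvt
                  exact Or.inl hvt
              · exact Or.inr (List.mem_cons_of_mem _ hmem)
    · have hstep : pvStep land n m x y (q0, vis) i = (q0, vis) := by
        unfold pvStep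
        simp only [if_neg hb]
      rw [hstep]
      obtain ⟨new, e1, e2, e3, e4, e5, e6⟩ := ih q0 vis hs
      refine ⟨new, e1, e2, e3, ?_, e5, ?_⟩
      · intro c hc
        obtain ⟨⟨j, hj, hcj⟩, h2, h3⟩ := e4 c hc
        exact ⟨⟨j, List.mem_cons_of_mem _ hj, hcj⟩, h2, h3⟩
      · intro j hj hop
        rcases List.mem_cons.mp hj with rfl | hj'
        · exact absurd hop.1 hb
        · exact e6 j hj' hop

theorem pvReach_subset (land : List (List Int)) (n m : Int) (V : Int × Int → Prop)
    (s : Int × Int) (S : Int × Int → Prop) (hs : S s)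
    (hcl : ∀ c : Int × Int, S c → ∀ d ∈ pvNbrs c, pvOpen land n m d → ¬ V d → S d) :
    ∀ c : Int × Int, pvReach land n m V s c → S c := by
  intro c h
  induction h with
  | base => exact hs
  | step h1 h2 h3 h4 ih => exact hcl _ ih _ h2 h3 h4

def pvPost (land : List (List Int)) (n m : Int) (V : Int × Int → Prop) (s : Int × Int)
    (r : List (List Bool) × Int × Int × Int) (E : Finset (Int × Int)) : Prop :=
  pvShape n m r.1 ∧
  (∀ c : Int × Int, pvInG n m c → (pvVisGet r.1 c.1 c.2 = true ↔ V c ∨ c ∈ E)) ∧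
  (∀ c ∈ E, ¬ V c) ∧ (∀ c ∈ E, pvInG n m c) ∧ s ∈ E ∧
  (∀ c ∈ E, pvReach land n m V s c) ∧
  (∀ c ∈ E, ∀ d ∈ pvNbrs c, pvOpen land n m d → ¬ V d → d ∈ E) ∧
  r.2.1 = (E.card : Int) ∧
  ((∃ c ∈ E, r.2.2.1 = c.2) ∧ ∀ c ∈ E, r.2.2.1 ≤ c.2) ∧
  ((∃ c ∈ E, r.2.2.2 = c.2) ∧ ∀ c ∈ E, c.2 ≤ r.2.2.2)

theorem pvBfsLoop_spec (land : List (List Int)) (n m : Int) (s : Int × Int)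
    (V : Int × Int → Prop) (fuel : Nat) (q : List (Int × Int))
    (vis : List (List Bool)) (count lo hi : Int) (D : Finset (Int × Int))
    (h1 : pvShape n m vis)
    (h2 : ∀ c : Int × Int, pvInG n m c → (pvVisGet vis c.1 c.2 = true ↔ V c ∨ c ∈ D))
    (h3 : ∀ c ∈ D, ¬ V c)
    (h4 : ∀ c ∈ D, pvInG n m c)
    (h5 : q.Nodup)
    (h6 : ∀ c ∈ q, c ∈ D)
    (h7 : ∀ c ∈ D, c ∉ q → ∀ d ∈ pvNbrs c, pvOpen land n m d → ¬ V d → d ∈ D)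
    (h8 : ∀ c ∈ D, pvReach land n m V s c)
    (h9 : s ∈ D)
    (h10 : count = (D.card : Int) - q.length)
    (h11 : ∃ c ∈ D, lo = c.2)
    (h12 : ∀ c ∈ D, c ∉ q → lo ≤ c.2)
    (h13 : ∃ c ∈ D, hi = c.2)
    (h14 : ∀ c ∈ D, c ∉ q → c.2 ≤ hi)
    (h15 : q.length +
      ((pvGrid n m).filter (fun c => pvVisGet vis c.1 c.2 = false)).card ≤ fuel) :
    ∃ E : Finset (Int × Int), D ⊆ E ∧
      pvPost land n m V s (pvBfsLoop land n m fuel q vis count lo hi) E := by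
  induction fuel generalizing q vis count lo hi D with
  | zero =>
    have hq : q = [] := List.length_eq_zero_iff.mp (by omega)
    subst hq
    refine ⟨D, Finset.Subset.refl D, h1, h2, h3, h4, h9, h8,
      fun c hc => h7 c hc (by simp), by simpa using h10, ⟨h11, ?_⟩, h13, ?_⟩
    · exact fun c hc => h12 c hc (by simp)
    · exact fun c hc => h14 c hc (by simp)
  | succ fuel ih =>
    match q, h5, h6, h15 with
    | [], h5, h6, h15 =>
      refine ⟨D, Finset.Subset.refl D, h1, h2, h3, h4, h9, h8,
        fun c hc => h7 c hc (by simp), by simpa using h10, ⟨h11, ?_⟩, h13, ?_⟩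
      · exact fun c hc => h12 c hc (by simp)
      · exact fun c hc => h14 c hc (by simp)
    | c :: rest, h5, h6, h15 =>
      have hcD : c ∈ D := h6 c (List.mem_cons_self ..)
      have hcInG := h4 c hcD
      obtain ⟨new, e1, e2, e3, e4, e5, e6⟩ :=
        pvExpand_go land n m c.1 c.2 pvDxdy rest vis h1
      have hloop : pvBfsLoop land n m (fuel + 1) (c :: rest) vis count lo hi =
          pvBfsLoop land n m fuel
            (pvDxdy.foldl (pvStep land n m c.1 c.2) (rest, vis)).1
            (pvDxdy.foldl (pvStep land n m c.1 c.2) (rest, vis)).2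
            (count + 1) (min lo c.2) (max hi c.2) := by
        show pvBfsLoop land n m fuel (pvExpand land n m c.1 c.2 (rest, vis)).1
            (pvExpand land n m c.1 c.2 (rest, vis)).2 (count + 1)
            (min lo c.2) (max hi c.2) = _
        rw [pvExpand_eq]
      rw [hloop]
      set vise := (pvDxdy.foldl (pvStep land n m c.1 c.2) (rest, vis)).2 with hvise
      have hq1 : (pvDxdy.foldl (pvStep land n m c.1 c.2) (rest, vis)).1 =
          rest ++ new := by rw [e1]
      rw [hq1]
      -- facts about new
      have hnbrs : ∀ e ∈ new, e ∈ pvNbrs c := by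
        intro e he
        obtain ⟨⟨i, hi, hei⟩, _, _⟩ := e4 e he
        exact List.mem_map.mpr ⟨i, hi, hei.symm⟩
      have hopen : ∀ e ∈ new, pvOpen land n m e := fun e he => (e4 e he).2.1
      have hunv : ∀ e ∈ new, pvVisGet vis e.1 e.2 = false :=
        fun e he => (e4 e he).2.2
      have hnewD : ∀ e ∈ new, e ∉ D := by
        intro e he heD
        have := (h2 e (hopen e he).1).mpr (Or.inr heD)
        rw [hunv e he] at this
        cases this
      have hnewV : ∀ e ∈ new, ¬ V e := by
        intro e he heV
        have := (h2 e (hopen e he).1).mpr (Or.inl heV)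
        rw [hunv e he] at this
        cases this
      have hnewRest : ∀ e ∈ new, e ∉ rest := by
        intro e he her
        exact hnewD e he (h6 e (List.mem_cons_of_mem _ her))
      -- the enlarged component
      have hcard : (D ∪ new.toFinset).card = D.card + new.length := by
        rw [Finset.card_union_of_disjoint, List.toFinset_card_of_nodup e3]
        rw [Finset.disjoint_right]
        intro e he
        exact hnewD e (List.mem_toFinset.mp he)
      have hsub : D ⊆ D ∪ new.toFinset := Finset.subset_union_left
      obtain ⟨E, hDE, hpost⟩ := ih (rest ++ new) vise (count + 1)
        (min lo c.2) (max hi c.2) (D ∪ new.toFinset)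
        e2
        (by
          rintro ⟨a, b⟩ hg
          obtain ⟨g1, g2, g3, g4⟩ := hg
          rw [e5 a b g1 g2 g3 g4, h2 (a, b) ⟨g1, g2, g3, g4⟩]
          simp only [Finset.mem_union, List.mem_toFinset]
          tauto)
        (by
          intro e he
          rcases Finset.mem_union.mp he with h | h
          · exact h3 e h
          · exact hnewV e (List.mem_toFinset.mp h))
        (by
          intro e he
          rcases Finset.mem_union.mp he with h | h
          · exact h4 e h
          · exact (hopen e (List.mem_toFinset.mp h)).1)
        (by
          refine List.Nodup.append (List.Nodup.of_cons h5) e3 ?_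
          intro e he1 he2
          exact hnewRest e he2 he1)
        (by
          intro e he
          rcases List.mem_append.mp he with h | h
          · exact hsub (h6 e (List.mem_cons_of_mem _ h))
          · exact Finset.mem_union_right _ (List.mem_toFinset.mpr h))
        (by
          -- closure
          intro c' hc' hnq d hd hop hV
          rcases Finset.mem_union.mp hc' with hcD' | hcnew
          · by_cases hcc : c' = c
            · subst hcc
              obtain ⟨i, hi, rfl⟩ := List.mem_map.mp hd
              rcases e6 i hi hop with hvt | hmem
              · rcases (h2 _ hop.1).mp hvt with h | h
                · exact absurd h hV
                · exact hsub h
              · exact Finset.mem_union_right _ (List.mem_toFinset.mpr hmem)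
            · have hcq : c' ∉ c :: rest := by
                intro h
                rcases List.mem_cons.mp h with h | h
                · exact hcc h
                · exact hnq (List.mem_append_left _ h)
              exact hsub (h7 c' hcD' hcq d hd hop hV)
          · exact absurd (List.mem_append_right _ (List.mem_toFinset.mp hcnew)) hnq)
        (by
          intro e he
          rcases Finset.mem_union.mp he with h | h
          · exact h8 e h
          · exact pvReach.step (h8 c hcD) (hnbrs e (List.mem_toFinset.mp h))
              (hopen e (List.mem_toFinset.mp h)) (hnewV e (List.mem_toFinset.mp h)))
        (hsub h9)
        (by
          rw [hcard]
          have hql : (c :: rest).length = rest.length + 1 := by simp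
          rw [hql] at h10
          simp only [List.length_append]
          push_cast
          push_cast at h10
          omega)
        (by
          rcases min_choice lo c.2 with h | h
          · obtain ⟨c0, hc0, hlo⟩ := h11
            exact ⟨c0, hsub hc0, by rw [h, hlo]⟩
          · exact ⟨c, hsub hcD, h⟩)
        (by
          intro c' hc' hnq
          rcases Finset.mem_union.mp hc' with hcD' | hcnew
          · by_cases hcc : c' = c
            · subst hcc
              exact min_le_right _ _
            · have : c' ∉ c :: rest := by
                intro h
                rcases List.mem_cons.mp h with h | h
                · exact hcc h
                · exact hnq (List.mem_append_left _ h)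
              exact le_trans (min_le_left _ _) (h12 c' hcD' this)
          · exact absurd (List.mem_append_right _ (List.mem_toFinset.mp hcnew)) hnq)
        (by
          rcases max_choice hi c.2 with h | h
          · obtain ⟨c0, hc0, hhi⟩ := h13
            exact ⟨c0, hsub hc0, by rw [h, hhi]⟩
          · exact ⟨c, hsub hcD, h⟩)
        (by
          intro c' hc' hnq
          rcases Finset.mem_union.mp hc' with hcD' | hcnew
          · by_cases hcc : c' = c
            · subst hcc
              exact le_max_right _ _
            · have : c' ∉ c :: rest := by
                intro h
                rcases List.mem_cons.mp h with h | h
                · exact hcc h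
                · exact hnq (List.mem_append_left _ h)
              exact le_trans (h14 c' hcD' this) (le_max_left _ _)
          · exact absurd (List.mem_append_right _ (List.mem_toFinset.mp hcnew)) hnq)
        (by
          -- fuel accounting
          have hFsub : new.toFinset ⊆
              (pvGrid n m).filter (fun c => pvVisGet vis c.1 c.2 = false) := by
            intro e he
            have he' := List.mem_toFinset.mp he
            rw [Finset.mem_filter]
            exact ⟨(mem_pvGrid n m e).mpr (hopen e he').1, hunv e he'⟩
          have hFeq : (pvGrid n m).filter (fun c => pvVisGet vise c.1 c.2 = false) =
              ((pvGrid n m).filter (fun c => pvVisGet vis c.1 c.2 = false)) \ new.toFinset := by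
            ext e
            simp only [Finset.mem_filter, Finset.mem_sdiff, List.mem_toFinset]
            constructor
            · rintro ⟨hg, hf⟩
              obtain ⟨g1, g2, g3, g4⟩ := (mem_pvGrid n m e).mp hg
              have hiff := e5 e.1 e.2 g1 g2 g3 g4
              rw [Prod.mk.eta] at hiff
              constructor
              · refine ⟨hg, ?_⟩
                rcases Bool.eq_false_iff.mp hf with _
                by_cases hvv : pvVisGet vis e.1 e.2 = true
                · exact absurd (hiff.mpr (Or.inl hvv)) (by simp [hf])
                · exact Bool.eq_false_iff.mpr hvv
              · intro hmem
                exact absurd (hiff.mpr (Or.inr hmem)) (by simp [hf])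
            · rintro ⟨⟨hg, hf⟩, hnm⟩
              obtain ⟨g1, g2, g3, g4⟩ := (mem_pvGrid n m e).mp hg
              have hiff := e5 e.1 e.2 g1 g2 g3 g4
              rw [Prod.mk.eta] at hiff
              refine ⟨hg, ?_⟩
              by_cases hvv : pvVisGet vise e.1 e.2 = true
              · rcases hiff.mp hvv with h | h
                · rw [h] at hf
                  cases hf
                · exact absurd h hnm
              · exact Bool.eq_false_iff.mpr hvv
          rw [hFeq, Finset.card_sdiff, Finset.inter_eq_left.mpr hFsub,
              List.toFinset_card_of_nodup e3]
          have hle := Finset.card_le_card hFsub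
          rw [List.toFinset_card_of_nodup e3] at hle
          simp only [List.length_append]
          simp only [List.length_cons] at h15
          omega)
      exact ⟨E, Finset.Subset.trans hsub hDE, hpost⟩

theorem mem_pvNbrs' (a e : Int × Int) :
    e ∈ pvNbrs a ↔ (e.1 = a.1 + 1 ∧ e.2 = a.2) ∨ (e.1 = a.1 - 1 ∧ e.2 = a.2) ∨
      (e.1 = a.1 ∧ e.2 = a.2 + 1) ∨ (e.1 = a.1 ∧ e.2 = a.2 - 1) := by
  simp [pvNbrs, pvDxdy, Prod.ext_iff]
  omega

theorem pvResultUpdate (count hi : Int) : ∀ (fuel : Nat) (lo : Int) (res : List Int),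
    (hi + 1 - lo).toNat ≤ fuel → 0 ≤ lo → hi < (res.length : Int) →
    ((PySem.List.pyRange lo (hi + 1) 1).foldl
      (fun r i => PySem.List.pySetD r i (PySem.List.pyGetD r i 0 + count))
      res).length = res.length ∧
    ∀ k : Nat, k < res.length →
      ((PySem.List.pyRange lo (hi + 1) 1).foldl
        (fun r i => PySem.List.pySetD r i (PySem.List.pyGetD r i 0 + count))
        res).getD k 0 =
        res.getD k 0 + (if lo ≤ (k : Int) ∧ (k : Int) ≤ hi then count else 0) := by
  intro fuel
  induction fuel with
  | zero =>
    intro lo res hf h0 hh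
    have hle : hi + 1 ≤ lo := by omega
    rw [PySem.List.pyRange_one_eq_nil hle]
    simp only [List.foldl_nil]
    refine ⟨by simp, fun k hk => ?_⟩
    have : ¬(lo ≤ (k : Int) ∧ (k : Int) ≤ hi) := by omega
    rw [if_neg this, add_zero]
  | succ fuel ih =>
    intro lo res hf h0 hh
    by_cases hle : hi + 1 ≤ lo
    · rw [PySem.List.pyRange_one_eq_nil hle]
      simp only [List.foldl_nil]
      refine ⟨by simp, fun k hk => ?_⟩
      have : ¬(lo ≤ (k : Int) ∧ (k : Int) ≤ hi) := by omega
      rw [if_neg this, add_zero]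
    · rw [PySem.List.pyRange_one_cons (by omega), List.foldl_cons]
      set res1 := PySem.List.pySetD res lo (PySem.List.pyGetD res lo 0 + count)
        with hres1
      have hlen1 : res1.length = res.length := by
        rw [hres1, PySem.List.pySetD_of_nonneg _ _ h0]
        simp
      have hval1 : ∀ k : Nat, k < res.length →
          res1.getD k 0 = res.getD k 0 +
            (if (k : Int) = lo then count else 0) := by
        intro k hk
        rw [hres1, PySem.List.pySetD_of_nonneg _ _ h0]
        rw [List.getD_eq_getElem _ _ (by simpa using hk),
            List.getD_eq_getElem _ _ hk]
        rw [List.getElem_set]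
        by_cases hkl : (k : Int) = lo
        · have : lo.toNat = k := by omega
          rw [if_pos this, if_pos hkl]
          rw [PySem.List.pyGetD_eq_getElem _ _ h0 (by omega)]
          have : lo.toNat = k := by omega
          simp [this]
        · have : lo.toNat ≠ k := by omega
          rw [if_neg this, if_neg hkl, add_zero]
      obtain ⟨ihlen, ihval⟩ := ih (lo + 1) res1 (by omega) (by omega)
        (by rw [hlen1]; exact hh)
      refine ⟨ihlen.trans hlen1, fun k hk => ?_⟩
      have h2 := ihval k (by omega)
      have h1 := hval1 k hk
      rw [h2, h1]
      split_ifs <;> omega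

-- ——— shared connectivity infrastructure ———

theorem pvR_of_reach (land : List (List Int)) (n m : Int) (V : Int × Int → Prop)
    (s c : Int × Int) (h : pvReach land n m V s c) : pvR land n m s c := by
  induction h with
  | base => exact pvReach.base
  | step h1 h2 h3 _ ih => exact pvReach.step ih h2 h3 (by simp)

theorem pvR_trans (land : List (List Int)) (n m : Int) (a b c : Int × Int)
    (h1 : pvR land n m a b) (h2 : pvR land n m b c) : pvR land n m a c := by
  induction h2 with
  | base => exact h1
  | step g1 g2 g3 _ ih => exact pvReach.step ih g2 g3 (by simp)

theorem pvR_open (land : List (List Int)) (n m : Int) (s c : Int × Int)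
    (hs : pvOpen land n m s) (h : pvR land n m s c) : pvOpen land n m c := by
  induction h with
  | base => exact hs
  | step _ _ h3 _ _ => exact h3

theorem pvNbrs_symm (a b : Int × Int) : a ∈ pvNbrs b ↔ b ∈ pvNbrs a := by
  rw [mem_pvNbrs', mem_pvNbrs']
  omega

theorem pvR_symm (land : List (List Int)) (n m : Int) (s c : Int × Int)
    (hs : pvOpen land n m s) (h : pvR land n m s c) : pvR land n m c s := by
  induction h with
  | base => exact pvReach.base
  | step h1 h2 h3 _ ih =>
    refine pvR_trans land n m _ _ _ ?_ ih
    exact pvReach.step pvReach.base ((pvNbrs_symm _ _).mpr h2)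
      (pvR_open land n m s _ hs h1) (by simp)

-- the connected component of s, as a Finset
noncomputable def compF (land : List (List Int)) (n m : Int) (s : Int × Int) :
    Finset (Int × Int) :=
  @Finset.filter _ (fun d => pvR land n m s d) (Classical.decPred _) (pvGrid n m)

theorem mem_compF (land : List (List Int)) (n m : Int) (s c : Int × Int) :
    c ∈ compF land n m s ↔ pvInG n m c ∧ pvR land n m s c := by
  unfold compF
  rw [@Finset.mem_filter _ _ (Classical.decPred _), mem_pvGrid]

theorem self_mem_compF (land : List (List Int)) (n m : Int) (s : Int × Int)
    (hs : pvOpen land n m s) : s ∈ compF land n m s :=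
  (mem_compF land n m s s).mpr ⟨hs.1, pvReach.base⟩

theorem compF_eq_of_pvR (land : List (List Int)) (n m : Int) (a b : Int × Int)
    (ha : pvOpen land n m a) (h : pvR land n m a b) :
    compF land n m a = compF land n m b := by
  ext c
  rw [mem_compF, mem_compF]
  constructor
  · rintro ⟨hg, hc⟩
    exact ⟨hg, pvR_trans land n m _ _ _ (pvR_symm land n m a b ha h) hc⟩
  · rintro ⟨hg, hc⟩
    exact ⟨hg, pvR_trans land n m _ _ _ h hc⟩

-- the contribution of one component to column k
noncomputable def gF (C : Finset (Int × Int)) (k : Int) : Int :=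
  if h : C.Nonempty then
    (if (C.image Prod.snd).min' (h.image _) ≤ k ∧ k ≤ (C.image Prod.snd).max' (h.image _)
      then (C.card : Int) else 0)
  else 0

theorem gF_of_bounds (C : Finset (Int × Int)) (cnt lo hi : Int)
    (hcnt : cnt = (C.card : Int))
    (hlo1 : ∃ c ∈ C, lo = c.2) (hlo2 : ∀ c ∈ C, lo ≤ c.2)
    (hhi1 : ∃ c ∈ C, hi = c.2) (hhi2 : ∀ c ∈ C, c.2 ≤ hi) :
    ∀ k : Int, (if lo ≤ k ∧ k ≤ hi then cnt else 0) = gF C k := by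
  intro k
  obtain ⟨c0, hc0, rfl⟩ := hlo1
  obtain ⟨c1, hc1, rfl⟩ := hhi1
  have hne : C.Nonempty := ⟨c0, hc0⟩
  have hmin : (C.image Prod.snd).min' (hne.image _) = c0.2 := by
    apply le_antisymm
    · exact Finset.min'_le _ _ (Finset.mem_image_of_mem _ hc0)
    · apply Finset.le_min'
      intro b hb
      obtain ⟨c, hc, rfl⟩ := Finset.mem_image.mp hb
      exact hlo2 c hc
  have hmax : (C.image Prod.snd).max' (hne.image _) = c1.2 := by
    apply le_antisymm
    · apply Finset.max'_le
      intro b hb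
      obtain ⟨c, hc, rfl⟩ := Finset.mem_image.mp hb
      exact hhi2 c hc
    · exact Finset.le_max' _ _ (Finset.mem_image_of_mem _ hc1)
  rw [gF, dif_pos hne, hmin, hmax, hcnt]

-- a valid list of component representatives
def pvGoodReps (land : List (List Int)) (n m : Int) (L : List (Int × Int)) : Prop :=
  (∀ r ∈ L, pvOpen land n m r) ∧
  List.Pairwise (fun a b => ¬ pvR land n m a b) L ∧
  (∀ c : Int × Int, pvOpen land n m c → ∃ r ∈ L, pvR land n m r c)

theorem pvGoodReps_sum_eq (land : List (List Int)) (n m : Int)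
    (L1 L2 : List (Int × Int)) (h1 : pvGoodReps land n m L1)
    (h2 : pvGoodReps land n m L2) (G : Finset (Int × Int) → Int) :
    (L1.map (fun r => G (compF land n m r))).sum =
      (L2.map (fun r => G (compF land n m r))).sum := by
  have key : ∀ L : List (Int × Int), pvGoodReps land n m L →
      (L.map (fun r => G (compF land n m r))).sum =
        ∑ C ∈ L.toFinset.image (compF land n m), G C := by
    intro L hL
    obtain ⟨hopen, hpw, _⟩ := hL
    have hnd : L.Nodup := by
      refine hpw.imp ?_
      intro a b hab heq
      exact hab (heq ▸ pvReach.base)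
    have hpw' : ∀ a ∈ L, ∀ b ∈ L, a ≠ b → ¬ pvR land n m a b ∨ ¬ pvR land n m b a := by
      intro a ha b hb hne
      have hS : List.Pairwise
          (fun a b => ¬ pvR land n m a b ∨ ¬ pvR land n m b a) L :=
        hpw.imp (fun h => Or.inl h)
      have hsymm : Symmetric (fun a b : Int × Int =>
          ¬ pvR land n m a b ∨ ¬ pvR land n m b a) := by
        intro a b h
        exact h.symm
      exact hS.forall hsymm ha hb hne
    have hinj : ∀ a ∈ L.toFinset, ∀ b ∈ L.toFinset,
        compF land n m a = compF land n m b → a = b := by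
      intro a ha b hb hC
      by_contra hne
      have ha' := List.mem_toFinset.mp ha
      have hb' := List.mem_toFinset.mp hb
      have haa : a ∈ compF land n m b := hC ▸ self_mem_compF land n m a (hopen a ha')
      have hbb : b ∈ compF land n m a := hC.symm ▸ self_mem_compF land n m b (hopen b hb')
      have hba : pvR land n m b a := ((mem_compF _ _ _ _ _).mp haa).2
      have hab : pvR land n m a b := ((mem_compF _ _ _ _ _).mp hbb).2
      rcases hpw' a ha' b hb' hne with h | h
      · exact h hab
      · exact h hba
    rw [Finset.sum_image hinj]
    rw [List.sum_toFinset _ hnd]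
  have himg : L1.toFinset.image (compF land n m) =
      L2.toFinset.image (compF land n m) := by
    have cover : ∀ La Lb : List (Int × Int), pvGoodReps land n m La →
        pvGoodReps land n m Lb →
        La.toFinset.image (compF land n m) ⊆ Lb.toFinset.image (compF land n m) := by
      intro La Lb hLa hLb C hC
      obtain ⟨r, hr, rfl⟩ := Finset.mem_image.mp hC
      have hr' := List.mem_toFinset.mp hr
      obtain ⟨r2, hr2, hR⟩ := hLb.2.2 r (hLa.1 r hr')
      exact Finset.mem_image.mpr ⟨r2, List.mem_toFinset.mpr hr2,
        compF_eq_of_pvR land n m r2 r (hLb.1 r2 hr2) hR⟩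
    exact le_antisymm (cover L1 L2 h1 h2) (cover L2 L1 h2 h1)
  rw [key L1 h1, key L2 h2, himg]



-- induction principle for a foldl over range(a, b)
theorem pvRangeInd {σ : Type} (f : σ → Int → σ) (Q : Int → σ → Prop) (a0 b : Int)
    (hstep : ∀ i s, a0 ≤ i → i < b → Q i s → Q (i + 1) (f s i)) :
    ∀ (k : Nat) (a : Int) (s : σ), a0 ≤ a → a ≤ b → (b - a).toNat ≤ k → Q a s →
      Q b ((PySem.List.pyRange a b 1).foldl f s) := by
  intro k
  induction k with
  | zero =>
    intro a s ha0 hab hk hQ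
    have hba : b = a := by omega
    subst hba
    rw [PySem.List.pyRange_one_eq_nil (le_refl b)]
    exact hQ
  | succ k ih =>
    intro a s ha0 hab hk hQ
    by_cases h : a < b
    · rw [PySem.List.pyRange_one_cons h, List.foldl_cons]
      exact ih (a + 1) (f s a) (by omega) (by omega) (by omega) (hstep a s ha0 h hQ)
    · have hba : b = a := by omega
      subst hba
      rw [PySem.List.pyRange_one_eq_nil (le_refl b)]
      exact hQ

theorem pvLtB_iff (a b : Int × Int) :
    pvLtB a b = true ↔ (a.1 < b.1 ∨ (a.1 = b.1 ∧ a.2 < b.2)) := by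
  simp [pvLtB]

theorem pvLtB_ne {a b : Int × Int} (h : pvLtB a b = true) : a ≠ b := by
  rw [pvLtB_iff] at h
  intro he
  subst he
  omega

theorem pvLtB_total {a b : Int × Int} (h : a ≠ b) :
    pvLtB a b = true ∨ pvLtB b a = true := by
  rw [pvLtB_iff, pvLtB_iff]
  by_cases h1 : a.1 = b.1
  · have h2 : a.2 ≠ b.2 := by
      intro h2
      exact h (Prod.ext h1 h2)
    omega
  · omega

-- raster-order measure: parent links strictly decrease it
def pvMu (m : Int) (c : Int × Int) : Nat := c.1.toNat * m.toNat + c.2.toNat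

theorem pvMu_lt (n m : Int) (c d : Int × Int) (_hc : pvInG n m c) (hd : pvInG n m d)
    (h : pvLtB d c = true) : pvMu m d < pvMu m c := by
  rw [pvLtB_iff] at h
  obtain ⟨d1, d2, d3, d4⟩ := hd
  unfold pvMu
  rcases h with h | ⟨h1, h2⟩
  · have hlt : d.1.toNat + 1 ≤ c.1.toNat := by omega
    have hm : d.2.toNat < m.toNat := by omega
    calc d.1.toNat * m.toNat + d.2.toNat
        < (d.1.toNat + 1) * m.toNat := by nlinarith
      _ ≤ c.1.toNat * m.toNat := Nat.mul_le_mul_right _ hlt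
      _ ≤ c.1.toNat * m.toNat + c.2.toNat := Nat.le_add_right _ _
  · have he : d.1.toNat = c.1.toNat := by omega
    rw [he]
    omega

theorem pvMu_lt_grid (n m : Int) (c : Int × Int) (hc : pvInG n m c) :
    pvMu m c < n.toNat * m.toNat := by
  obtain ⟨c1, c2, c3, c4⟩ := hc
  unfold pvMu
  have h2 : c.2.toNat < m.toNat := by omega
  have h1 : c.1.toNat + 1 ≤ n.toNat := by omega
  calc c.1.toNat * m.toNat + c.2.toNat
      < (c.1.toNat + 1) * m.toNat := by nlinarith
    _ ≤ n.toNat * m.toNat := Nat.mul_le_mul_right _ h1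

-- the union-find invariant: keys are exactly the open cells, every parent link points to
-- an open cell that is weakly smaller in raster order and in the same component
def pvW (land : List (List Int)) (n m : Int)
    (P : PySem.Dict (Int × Int) (Int × Int)) : Prop :=
  (∀ c : Int × Int, P.contains c = true ↔ pvOpen land n m c) ∧
  (∀ c d : Int × Int, P.get? c = some d →
    (d = c ∨ pvLtB d c = true) ∧ pvOpen land n m d ∧ pvR land n m c d)

theorem pvW_get (land : List (List Int)) (n m : Int)
    (P : PySem.Dict (Int × Int) (Int × Int)) (hW : pvW land n m P)
    (c : Int × Int) (hc : pvOpen land n m c) : ∃ d, P.get? c = some d := by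
  have := (hW.1 c).mpr hc
  rw [PySem.Dict.contains_eq_isSome_get?] at this
  exact Option.isSome_iff_exists.mp this

theorem pvFind_stable (land : List (List Int)) (n m : Int)
    (P : PySem.Dict (Int × Int) (Int × Int)) (hW : pvW land n m P) :
    ∀ (k : Nat) (c : Int × Int), pvOpen land n m c → pvMu m c ≤ k →
      ∀ f1 f2 : Nat, pvMu m c < f1 → pvMu m c < f2 →
        pvFind P f1 c = pvFind P f2 c := by
  intro k
  induction k with
  | zero =>
    intro c hc hk f1 f2 h1 h2
    obtain ⟨d, hd⟩ := pvW_get land n m P hW c hc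
    obtain ⟨hdc, hdo, _⟩ := hW.2 c d hd
    match f1, h1 with
    | f1 + 1, _ =>
    match f2, h2 with
    | f2 + 1, _ =>
    rcases hdc with rfl | hlt
    · simp [pvFind, hd]
    · exact absurd (pvMu_lt n m c d hc.1 hdo.1 hlt) (by omega)
  | succ k ih =>
    intro c hc hk f1 f2 h1 h2
    obtain ⟨d, hd⟩ := pvW_get land n m P hW c hc
    obtain ⟨hdc, hdo, _⟩ := hW.2 c d hd
    match f1, h1 with
    | f1 + 1, _ =>
    match f2, h2 with
    | f2 + 1, _ =>
    rcases hdc with rfl | hlt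
    · simp [pvFind, hd]
    · have hne : d ≠ c := pvLtB_ne hlt
      have hmu : pvMu m d < pvMu m c := pvMu_lt n m c d hc.1 hdo.1 hlt
      simp only [pvFind, hd, if_neg hne]
      exact ih d hdo (by omega) f1 f2 (by omega) (by omega)

theorem pvFind_props (land : List (List Int)) (n m : Int)
    (P : PySem.Dict (Int × Int) (Int × Int)) (hW : pvW land n m P) :
    ∀ (k : Nat) (c : Int × Int), pvOpen land n m c → pvMu m c ≤ k →
      ∀ f : Nat, pvMu m c < f →
        P.get? (pvFind P f c) = some (pvFind P f c) ∧
        pvOpen land n m (pvFind P f c) ∧ pvR land n m c (pvFind P f c) := by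
  intro k
  induction k with
  | zero =>
    intro c hc hk f hf
    obtain ⟨d, hd⟩ := pvW_get land n m P hW c hc
    obtain ⟨hdc, hdo, _⟩ := hW.2 c d hd
    match f, hf with
    | f + 1, _ =>
    rcases hdc with rfl | hlt
    · simp only [pvFind, hd]
      exact ⟨hd, hc, pvReach.base⟩
    · exact absurd (pvMu_lt n m c d hc.1 hdo.1 hlt) (by omega)
  | succ k ih =>
    intro c hc hk f hf
    obtain ⟨d, hd⟩ := pvW_get land n m P hW c hc
    obtain ⟨hdc, hdo, hdr⟩ := hW.2 c d hd
    match f, hf with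
    | f + 1, _ =>
    rcases hdc with rfl | hlt
    · simp only [pvFind, hd]
      exact ⟨hd, hc, pvReach.base⟩
    · have hne : d ≠ c := pvLtB_ne hlt
      have hmu : pvMu m d < pvMu m c := pvMu_lt n m c d hc.1 hdo.1 hlt
      simp only [pvFind, hd, if_neg hne]
      obtain ⟨p1, p2, p3⟩ := ih d hdo (by omega) f (by omega)
      exact ⟨p1, p2, pvR_trans land n m _ _ _ hdr p3⟩

-- the canonical root (B's find with the port's fuel)
def pvRootF (n m : Int) (P : PySem.Dict (Int × Int) (Int × Int)) (c : Int × Int) :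
    Int × Int :=
  pvFind P (n.toNat * m.toNat + 1) c

theorem pvRoot_fix (land : List (List Int)) (n m : Int)
    (P : PySem.Dict (Int × Int) (Int × Int)) (hW : pvW land n m P)
    (c : Int × Int) (hc : pvOpen land n m c) :
    P.get? (pvRootF n m P c) = some (pvRootF n m P c) ∧
    pvOpen land n m (pvRootF n m P c) ∧ pvR land n m c (pvRootF n m P c) :=
  pvFind_props land n m P hW (pvMu m c) c hc (le_refl _)
    (n.toNat * m.toNat + 1) (by have := pvMu_lt_grid n m c hc.1; omega)

theorem pvRoot_self (n m : Int) (P : PySem.Dict (Int × Int) (Int × Int))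
    (c : Int × Int) (h : P.get? c = some c) : pvRootF n m P c = c := by
  simp [pvRootF, pvFind, h]

theorem pvRoot_idem (land : List (List Int)) (n m : Int)
    (P : PySem.Dict (Int × Int) (Int × Int)) (hW : pvW land n m P)
    (c : Int × Int) (hc : pvOpen land n m c) :
    pvRootF n m P (pvRootF n m P c) = pvRootF n m P c :=
  pvRoot_self n m P _ (pvRoot_fix land n m P hW c hc).1

theorem pvRoot_step (land : List (List Int)) (n m : Int)
    (P : PySem.Dict (Int × Int) (Int × Int)) (hW : pvW land n m P)
    (c d : Int × Int) (hc : pvOpen land n m c) (hd : P.get? c = some d)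
    (hne : d ≠ c) : pvRootF n m P c = pvRootF n m P d := by
  obtain ⟨hdc, hdo, _⟩ := hW.2 c d hd
  have hlt : pvLtB d c = true := by
    rcases hdc with rfl | h
    · exact absurd rfl hne
    · exact h
  have hmu : pvMu m d < pvMu m c := pvMu_lt n m c d hc.1 hdo.1 hlt
  have hmuc := pvMu_lt_grid n m c hc.1
  show pvFind P (n.toNat * m.toNat + 1) c = pvRootF n m P d
  simp only [pvFind, hd, if_neg hne]
  exact pvFind_stable land n m P hW (pvMu m d) d hdo (le_refl _) _ _
    (by omega) (by omega)


-- classical if-then-else for stating lookups of possibly-undecidable shape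
noncomputable def pvIte {α : Type} (p : Prop) (a b : α) : α :=
  @ite _ p (Classical.propDecidable p) a b

theorem pvIte_pos {α : Type} {p : Prop} (h : p) (a b : α) : pvIte p a b = a := by
  unfold pvIte
  exact if_pos h

theorem pvIte_neg {α : Type} {p : Prop} (h : ¬ p) (a b : α) : pvIte p a b = b := by
  unfold pvIte
  exact if_neg h

theorem pvIte_congr {α : Type} {p q : Prop} (h : p ↔ q) (a b : α) :
    pvIte p a b = pvIte q a b := by
  by_cases hp : p
  · rw [pvIte_pos hp, pvIte_pos (h.mp hp)]
  · rw [pvIte_neg hp, pvIte_neg (fun hq => hp (h.mpr hq))]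

-- ——— initial parent dict ———

theorem pvParent0_get (land : List (List Int)) (n m : Int) (hn : 0 ≤ n) (hm : 0 ≤ m) :
    ∀ c : Int × Int, (pvParent0 land n m).get? c =
      pvIte (pvOpen land n m c) (some c) none := by
  have main := pvRangeInd
    (fun P x => (PySem.List.pyRange 0 m 1).foldl (fun P y =>
      if cellD land x y ≠ 0 then P.insert (x, y) (x, y) else P) P)
    (fun x P => ∀ c : Int × Int, P.get? c =
      pvIte (c.1 < x ∧ pvOpen land n m c) (some c) none)
    0 n
    (by
      intro X P hX hXn hQ
      have inner := pvRangeInd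
        (fun P y => if cellD land X y ≠ 0 then P.insert (X, y) (X, y) else P)
        (fun y P => ∀ c : Int × Int, P.get? c =
          pvIte ((c.1 < X ∨ (c.1 = X ∧ c.2 < y)) ∧ pvOpen land n m c) (some c) none)
        0 m
        (by
          intro y P hy hym hQ' c
          by_cases hz : cellD land X y ≠ 0
          · simp only [if_pos hz]
            rw [PySem.Dict.get?_insert]
            by_cases hc : c = (X, y)
            · subst hc
              rw [if_pos rfl]
              have hop : pvOpen land n m (X, y) := ⟨⟨hX, hXn, hy, hym⟩, hz⟩
              rw [pvIte_pos (⟨Or.inr ⟨rfl, by omega⟩, hop⟩ :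
                (((X, y) : Int × Int).1 < X ∨ (((X, y) : Int × Int).1 = X ∧
                  ((X, y) : Int × Int).2 < y + 1)) ∧ pvOpen land n m (X, y))]
            · rw [if_neg hc, hQ' c]
              refine pvIte_congr ?_ _ _
              constructor
              · rintro ⟨h1, h2⟩
                exact ⟨by omega, h2⟩
              · rintro ⟨h1, h2⟩
                refine ⟨?_, h2⟩
                rcases h1 with h | ⟨he, hlt⟩
                · exact Or.inl h
                · by_cases hcy : c.2 = y
                  · exact absurd (Prod.ext he hcy) hc
                  · exact Or.inr ⟨he, by omega⟩
          · simp only [if_neg hz]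
            rw [hQ' c]
            refine pvIte_congr ?_ _ _
            constructor
            · rintro ⟨h1, h2⟩
              exact ⟨by omega, h2⟩
            · rintro ⟨h1, h2⟩
              refine ⟨?_, h2⟩
              rcases h1 with h | ⟨he, hlt⟩
              · exact Or.inl h
              · by_cases hcy : c.2 = y
                · exfalso
                  apply hz
                  have hce : c = (X, y) := Prod.ext he hcy
                  rw [hce] at h2
                  exact h2.2
                · exact Or.inr ⟨he, by omega⟩)
        m.toNat 0 P (le_refl 0) hm (by omega)
        (by
          intro c
          rw [hQ c]
          refine pvIte_congr ?_ _ _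
          constructor
          · rintro ⟨h1, h2⟩
            exact ⟨Or.inl h1, h2⟩
          · rintro ⟨h1, h2⟩
            refine ⟨?_, h2⟩
            rcases h1 with h | ⟨_, hlt⟩
            · exact h
            · exfalso
              obtain ⟨⟨_, _, h3, _⟩, _⟩ := h2
              omega)
      intro c
      rw [inner c]
      refine pvIte_congr ?_ _ _
      constructor
      · rintro ⟨h1, h2⟩
        refine ⟨?_, h2⟩
        rcases h1 with h | ⟨he, _⟩
        · omega
        · omega
      · rintro ⟨h1, h2⟩
        by_cases hcx : c.1 = X
        · obtain ⟨⟨g1, g2, g3, g4⟩, g5⟩ := h2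
          exact ⟨Or.inr ⟨hcx, g4⟩, ⟨⟨g1, g2, g3, g4⟩, g5⟩⟩
        · exact ⟨Or.inl (by omega), h2⟩)
    n.toNat 0 PySem.Dict.empty (le_refl 0) hn (by omega)
    (by
      intro c
      rw [PySem.Dict.get?_empty]
      rw [pvIte_neg]
      rintro ⟨h1, ⟨⟨h2, _, _, _⟩, _⟩⟩
      omega)
  intro c
  rw [show pvParent0 land n m = ((PySem.List.pyRange 0 n 1).foldl (fun P x =>
      (PySem.List.pyRange 0 m 1).foldl (fun P y =>
        if cellD land x y ≠ 0 then P.insert (x, y) (x, y) else P) P)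
      PySem.Dict.empty) from rfl, main c]
  refine pvIte_congr ?_ _ _
  constructor
  · exact fun h => h.2
  · intro h
    obtain ⟨⟨g1, g2, g3, g4⟩, g5⟩ := h
    exact ⟨g2, ⟨⟨g1, g2, g3, g4⟩, g5⟩⟩

theorem pvW_parent0 (land : List (List Int)) (n m : Int) (hn : 0 ≤ n) (hm : 0 ≤ m) :
    pvW land n m (pvParent0 land n m) := by
  constructor
  · intro c
    rw [PySem.Dict.contains_eq_isSome_get?, pvParent0_get land n m hn hm c]
    by_cases h : pvOpen land n m c
    · rw [pvIte_pos h]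
      simp [h]
    · rw [pvIte_neg h]
      simp [h]
  · intro c d hcd
    rw [pvParent0_get land n m hn hm c] at hcd
    by_cases h : pvOpen land n m c
    · rw [pvIte_pos h] at hcd
      cases hcd
      exact ⟨Or.inl rfl, h, pvReach.base⟩
    · rw [pvIte_neg h] at hcd
      cases hcd

-- ——— the effect of one union on all roots ———

theorem pvW_insert (land : List (List Int)) (n m : Int)
    (P : PySem.Dict (Int × Int) (Int × Int)) (hW : pvW land n m P)
    (ra rb : Int × Int) (hrao : pvOpen land n m ra) (hrbo : pvOpen land n m rb)
    (hlt : pvLtB ra rb = true) (hR : pvR land n m rb ra) :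
    pvW land n m (P.insert rb ra) := by
  constructor
  · intro c
    rw [PySem.Dict.contains_insert]
    by_cases hc : c = rb
    · subst hc
      simp [hrbo]
    · rw [show (c == rb) = false from beq_eq_false_iff_ne.mpr hc, Bool.false_or]
      exact hW.1 c
  · intro c d hcd
    rw [PySem.Dict.get?_insert] at hcd
    by_cases hc : c = rb
    · subst hc
      rw [if_pos rfl] at hcd
      cases hcd
      exact ⟨Or.inr hlt, hrao, hR⟩
    · rw [if_neg hc] at hcd
      exact hW.2 c d hcd

theorem pvRoot_insert (land : List (List Int)) (n m : Int)
    (P : PySem.Dict (Int × Int) (Int × Int)) (hW : pvW land n m P)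
    (ra rb : Int × Int) (hrao : pvOpen land n m ra) (hrbo : pvOpen land n m rb)
    (hfa : P.get? ra = some ra) (hfb : P.get? rb = some rb)
    (hlt : pvLtB ra rb = true) (hR : pvR land n m rb ra) :
    ∀ (k : Nat) (c : Int × Int), pvOpen land n m c → pvMu m c ≤ k →
      pvRootF n m (P.insert rb ra) c =
        (if pvRootF n m P c = rb then ra else pvRootF n m P c) := by
  have hW' := pvW_insert land n m P hW ra rb hrao hrbo hlt hR
  have hne : ra ≠ rb := pvLtB_ne hlt
  have hrb_case : pvRootF n m (P.insert rb ra) rb = ra := by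
    have hget : (P.insert rb ra).get? rb = some ra := PySem.Dict.get?_insert_self _ _ _
    have hgeta : (P.insert rb ra).get? ra = some ra := by
      rw [PySem.Dict.get?_insert_of_ne _ _ hne]
      exact hfa
    show pvFind (P.insert rb ra) (n.toNat * m.toNat + 1) rb = ra
    obtain ⟨f, hf⟩ : ∃ f, n.toNat * m.toNat = f + 1 :=
      ⟨n.toNat * m.toNat - 1, by have := pvMu_lt_grid n m ra hrao.1; omega⟩
    simp only [pvFind, hget, if_neg hne, hf]
    simp [hgeta]
  intro k
  induction k with
  | zero =>
    intro c hc hk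
    by_cases hcrb : c = rb
    · rw [hcrb, hrb_case, pvRoot_self n m P rb hfb, if_pos rfl]
    · obtain ⟨d, hd⟩ := pvW_get land n m P hW c hc
      obtain ⟨hdc, hdo, _⟩ := hW.2 c d hd
      have hd' : (P.insert rb ra).get? c = some d := by
        rw [PySem.Dict.get?_insert_of_ne _ _ hcrb]
        exact hd
      rcases hdc with hdc | hltd
      · rw [hdc] at hd hd'
        rw [pvRoot_self n m _ c hd', pvRoot_self n m P c hd, if_neg hcrb]
      · exact absurd (pvMu_lt n m c d hc.1 hdo.1 hltd) (by omega)
  | succ k ih =>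
    intro c hc hk
    by_cases hcrb : c = rb
    · rw [hcrb, hrb_case, pvRoot_self n m P rb hfb, if_pos rfl]
    · obtain ⟨d, hd⟩ := pvW_get land n m P hW c hc
      obtain ⟨hdc, hdo, _⟩ := hW.2 c d hd
      have hd' : (P.insert rb ra).get? c = some d := by
        rw [PySem.Dict.get?_insert_of_ne _ _ hcrb]
        exact hd
      rcases hdc with hdc | hltd
      · rw [hdc] at hd hd'
        rw [pvRoot_self n m _ c hd', pvRoot_self n m P c hd, if_neg hcrb]
      · have hnecd : d ≠ c := pvLtB_ne hltd
        have hmu : pvMu m d < pvMu m c := pvMu_lt n m c d hc.1 hdo.1 hltd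
        rw [pvRoot_step land n m _ hW' c d hc hd' hnecd,
            pvRoot_step land n m P hW c d hc hd hnecd]
        exact ih d hdo (by omega)

-- ——— one union step and its effect on roots ———

def pvUBody (land : List (List Int)) (n m : Int)
    (P : PySem.Dict (Int × Int) (Int × Int)) (x y : Int) (c : Int × Int) :
    PySem.Dict (Int × Int) (Int × Int) :=
  if c.1 < n ∧ c.2 < m ∧ cellD land c.1 c.2 ≠ 0 then
    let ra := pvFind P (n.toNat * m.toNat + 1) (x, y)
    let rb := pvFind P (n.toNat * m.toNat + 1) c
    if ra = rb then P
    else if pvLtB rb ra then P.insert ra rb else P.insert rb ra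
  else P

theorem pvUnion_eq (land : List (List Int)) (n m : Int)
    (P : PySem.Dict (Int × Int) (Int × Int)) (x y : Int) :
    pvUnion land n m (n.toNat * m.toNat + 1) P x y =
      pvUBody land n m (pvUBody land n m P x y (x + 1, y)) x y (x, y + 1) := rfl

theorem pvUStep_spec (land : List (List Int)) (n m : Int)
    (P : PySem.Dict (Int × Int) (Int × Int)) (hW : pvW land n m P)
    (x y : Int) (hx : 0 ≤ x) (_hxn : x < n) (hy : 0 ≤ y) (_hym : y < m)
    (hxyo : pvOpen land n m (x, y)) (c : Int × Int)
    (hcs : c = (x + 1, y) ∨ c = (x, y + 1)) :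
    ∃ h : (Int × Int) → (Int × Int),
      pvW land n m (pvUBody land n m P x y c) ∧
      (∀ e, pvOpen land n m e →
        pvRootF n m (pvUBody land n m P x y c) e = h (pvRootF n m P e)) ∧
      (pvOpen land n m c →
        pvRootF n m (pvUBody land n m P x y c) (x, y) =
          pvRootF n m (pvUBody land n m P x y c) c) := by
  by_cases hg : c.1 < n ∧ c.2 < m ∧ cellD land c.1 c.2 ≠ 0
  · have hco : pvOpen land n m c := by
      refine ⟨⟨?_, hg.1, ?_, hg.2.1⟩, hg.2.2⟩
      · rcases hcs with rfl | rfl <;> simp <;> omega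
      · rcases hcs with rfl | rfl <;> simp <;> omega
    obtain ⟨fixa, opena, hxyra⟩ := pvRoot_fix land n m P hW (x, y) hxyo
    obtain ⟨fixb, openb, hcrb⟩ := pvRoot_fix land n m P hW c hco
    have hnbr : ((x, y) : Int × Int) ∈ pvNbrs c := by
      rw [mem_pvNbrs']
      rcases hcs with rfl | rfl
      · right; left; constructor <;> simp
      · right; right; right; constructor <;> simp
    have hRcxy : pvR land n m c (x, y) :=
      pvReach.step pvReach.base hnbr hxyo (by simp)
    have hRxyc : pvR land n m (x, y) c := pvR_symm land n m c (x, y) hco hRcxy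
    set ra := pvRootF n m P (x, y) with hra_def
    set rb := pvRootF n m P c with hrb_def
    have hRba : pvR land n m rb ra :=
      pvR_trans land n m _ _ _
        (pvR_trans land n m _ _ _ (pvR_symm land n m c rb hco hcrb) hRcxy) hxyra
    have hRab : pvR land n m ra rb :=
      pvR_trans land n m _ _ _
        (pvR_trans land n m _ _ _ (pvR_symm land n m (x, y) ra hxyo hxyra) hRxyc) hcrb
    have hbody : pvUBody land n m P x y c =
        (if ra = rb then P
         else if pvLtB rb ra then P.insert ra rb else P.insert rb ra) := by
      unfold pvUBody
      rw [if_pos hg]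
      rfl
    by_cases heq : ra = rb
    · refine ⟨id, ?_, ?_, ?_⟩
      · rw [hbody, if_pos heq]
        exact hW
      · intro e _
        rw [hbody, if_pos heq]
        rfl
      · intro _
        rw [hbody, if_pos heq, ← hra_def, ← hrb_def, heq]
    · by_cases hlt : pvLtB rb ra = true
      · have hP' : pvUBody land n m P x y c = P.insert ra rb := by
          rw [hbody, if_neg heq, if_pos hlt]
        have hW' := pvW_insert land n m P hW rb ra openb opena hlt hRab
        rw [hP'] at *
        refine ⟨fun r => if r = ra then rb else r, hW', ?_, ?_⟩
        · intro e he
          exact pvRoot_insert land n m P hW rb ra openb opena fixb fixa hlt hRab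
            (pvMu m e) e he (le_refl _)
        · intro _
          have e1 := pvRoot_insert land n m P hW rb ra openb opena fixb fixa hlt hRab
            (pvMu m (x, y)) (x, y) hxyo (le_refl _)
          have e2 := pvRoot_insert land n m P hW rb ra openb opena fixb fixa hlt hRab
            (pvMu m c) c hco (le_refl _)
          rw [e1, e2, ← hra_def, ← hrb_def, if_pos rfl,
            if_neg (fun h => heq h.symm)]
      · have hlt' : pvLtB ra rb = true := by
          rcases pvLtB_total heq with h | h
          · exact h
          · exact absurd h hlt
        have hP' : pvUBody land n m P x y c = P.insert rb ra := by
          rw [hbody, if_neg heq, if_neg (by simp [hlt])]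
        have hW' := pvW_insert land n m P hW ra rb opena openb hlt' hRba
        rw [hP'] at *
        refine ⟨fun r => if r = rb then ra else r, hW', ?_, ?_⟩
        · intro e he
          exact pvRoot_insert land n m P hW ra rb opena openb fixa fixb hlt' hRba
            (pvMu m e) e he (le_refl _)
        · intro _
          have e1 := pvRoot_insert land n m P hW ra rb opena openb fixa fixb hlt' hRba
            (pvMu m (x, y)) (x, y) hxyo (le_refl _)
          have e2 := pvRoot_insert land n m P hW ra rb opena openb fixa fixb hlt' hRba
            (pvMu m c) c hco (le_refl _)
          rw [e1, e2, ← hra_def, ← hrb_def, if_neg heq, if_pos rfl]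
  · have hP' : pvUBody land n m P x y c = P := by
      unfold pvUBody
      rw [if_neg hg]
    rw [hP']
    refine ⟨id, hW, fun e _ => rfl, ?_⟩
    intro hco
    exact absurd ⟨hco.1.2.1, hco.1.2.2.2, hco.2⟩ hg

-- ——— the whole union pass ———

def pvUPair (land : List (List Int)) (n m : Int) (c d : Int × Int) : Prop :=
  pvOpen land n m c ∧ pvOpen land n m d ∧
    (d = (c.1 + 1, c.2) ∨ d = (c.1, c.2 + 1))

theorem pvUnionPhase (land : List (List Int)) (n m : Int) (hn : 0 ≤ n) (hm : 0 ≤ m) :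
    pvW land n m
      ((PySem.List.pyRange 0 n 1).foldl (fun P x =>
        (PySem.List.pyRange 0 m 1).foldl (fun P y =>
          if cellD land x y = 0 then P
          else pvUnion land n m (n.toNat * m.toNat + 1) P x y) P)
        (pvParent0 land n m)) ∧
    ∀ c d, pvUPair land n m c d →
      pvRootF n m ((PySem.List.pyRange 0 n 1).foldl (fun P x =>
        (PySem.List.pyRange 0 m 1).foldl (fun P y =>
          if cellD land x y = 0 then P
          else pvUnion land n m (n.toNat * m.toNat + 1) P x y) P)
        (pvParent0 land n m)) c =
      pvRootF n m ((PySem.List.pyRange 0 n 1).foldl (fun P x =>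
        (PySem.List.pyRange 0 m 1).foldl (fun P y =>
          if cellD land x y = 0 then P
          else pvUnion land n m (n.toNat * m.toNat + 1) P x y) P)
        (pvParent0 land n m)) d := by
  have main := pvRangeInd
    (fun P x => (PySem.List.pyRange 0 m 1).foldl (fun P y =>
      if cellD land x y = 0 then P
      else pvUnion land n m (n.toNat * m.toNat + 1) P x y) P)
    (fun x P => pvW land n m P ∧ ∀ c d, pvUPair land n m c d → c.1 < x →
      pvRootF n m P c = pvRootF n m P d)
    0 n
    (by
      intro X P hX hXn hQ
      have inner := pvRangeInd
        (fun P y => if cellD land X y = 0 then P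
          else pvUnion land n m (n.toNat * m.toNat + 1) P X y)
        (fun y P => pvW land n m P ∧ ∀ c d, pvUPair land n m c d →
          (c.1 < X ∨ (c.1 = X ∧ c.2 < y)) → pvRootF n m P c = pvRootF n m P d)
        0 m
        (by
          intro y P hy hym hQ'
          by_cases hz : cellD land X y = 0
          · simp only [if_pos hz]
            refine ⟨hQ'.1, ?_⟩
            intro c d hp hcond
            apply hQ'.2 c d hp
            rcases hcond with h | ⟨he, hlt⟩
            · exact Or.inl h
            · by_cases hcy : c.2 = y
              · exfalso
                have hce : c = (X, y) := Prod.ext he hcy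
                rw [hce] at hp
                exact hp.1.2 hz
              · exact Or.inr ⟨he, by omega⟩
          · simp only [if_neg hz]
            have hxyo : pvOpen land n m (X, y) := ⟨⟨hX, hXn, hy, hym⟩, hz⟩
            obtain ⟨h1, hW1, he1, heq1⟩ := pvUStep_spec land n m P hQ'.1 X y
              hX hXn hy hym hxyo (X + 1, y) (Or.inl rfl)
            obtain ⟨h2, hW2, he2, heq2⟩ := pvUStep_spec land n m
              (pvUBody land n m P X y (X + 1, y)) hW1 X y
              hX hXn hy hym hxyo (X, y + 1) (Or.inr rfl)
            rw [pvUnion_eq]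
            refine ⟨hW2, ?_⟩
            intro c d hp hcond
            have hcop := hp.1
            have hdop := hp.2.1
            by_cases hold : c.1 < X ∨ (c.1 = X ∧ c.2 < y)
            · have := hQ'.2 c d hp hold
              rw [he2 c hcop, he2 d hdop, he1 c hcop, he1 d hdop, this]
            · have hce : c = (X, y) := by
                rcases hcond with h | ⟨he, hlt⟩
                · exact absurd (Or.inl h) hold
                · have hcy : c.2 = y := by
                    by_cases hcy : c.2 = y
                    · exact hcy
                    · exact absurd (Or.inr ⟨he, by omega⟩) hold
                  exact Prod.ext he hcy
              subst hce
              rcases hp.2.2 with hd | hd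
              · -- d is the right neighbour (X + 1, y)
                have : d = (X + 1, y) := by
                  rw [hd]
                have hr1 : pvRootF n m (pvUBody land n m P X y (X + 1, y)) (X, y) =
                    pvRootF n m (pvUBody land n m P X y (X + 1, y)) (X + 1, y) := by
                  apply heq1
                  rw [← this]
                  exact hdop
                rw [this, he2 _ hcop, he2 _ (by rw [← this]; exact hdop), hr1]
              · have : d = (X, y + 1) := by
                  rw [hd]
                rw [this]
                apply heq2
                rw [← this]
                exact hdop)
        m.toNat 0 P (le_refl 0) hm (by omega)
        (by
          refine ⟨hQ.1, ?_⟩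
          intro c d hp hcond
          apply hQ.2 c d hp
          rcases hcond with h | ⟨_, hlt⟩
          · exact h
          · exfalso
            obtain ⟨⟨_, _, h3, _⟩, _⟩ := hp.1
            omega)
      refine ⟨inner.1, ?_⟩
      intro c d hp hcond
      apply inner.2 c d hp
      by_cases hcx : c.1 = X
      · obtain ⟨⟨_, _, _, h4⟩, _⟩ := hp.1
        exact Or.inr ⟨hcx, h4⟩
      · exact Or.inl (by omega))
    n.toNat 0 (pvParent0 land n m) (le_refl 0) hn (by omega)
    (by
      refine ⟨pvW_parent0 land n m hn hm, ?_⟩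
      intro c d hp hcond
      exfalso
      obtain ⟨⟨h1, _, _, _⟩, _⟩ := hp.1
      omega)
  refine ⟨main.1, ?_⟩
  intro c d hp
  obtain ⟨⟨_, h2, _, _⟩, _⟩ := hp.1
  exact main.2 c d hp h2

theorem pvRoot_const (land : List (List Int)) (n m : Int)
    (P : PySem.Dict (Int × Int) (Int × Int)) (_hW : pvW land n m P)
    (hpairs : ∀ c d, pvUPair land n m c d → pvRootF n m P c = pvRootF n m P d) :
    ∀ c d, pvOpen land n m c → pvR land n m c d →
      pvRootF n m P c = pvRootF n m P d := by
  intro c d hc h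
  induction h with
  | base => rfl
  | @step c' d' h1 h2 h3 _ ih =>
    have hc' : pvOpen land n m c' := pvR_open land n m c c' hc h1
    rw [ih]
    rw [mem_pvNbrs'] at h2
    rcases h2 with ⟨e1, e2⟩ | ⟨e1, e2⟩ | ⟨e1, e2⟩ | ⟨e1, e2⟩
    · exact hpairs c' d' ⟨hc', h3, Or.inl (Prod.ext e1 e2)⟩
    · exact (hpairs d' c' ⟨h3, hc', Or.inl (Prod.ext (by omega) (by omega))⟩).symm
    · exact hpairs c' d' ⟨hc', h3, Or.inr (Prod.ext e1 e2)⟩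
    · exact (hpairs d' c' ⟨h3, hc', Or.inr (Prod.ext (by omega) (by omega))⟩).symm

-- ——— the stats pass ———

noncomputable def pvSSet (land : List (List Int)) (n m : Int)
    (R : (Int × Int) → (Int × Int)) (Pr : (Int × Int) → Prop) (r : Int × Int) :
    Finset (Int × Int) :=
  @Finset.filter _ (fun c => Pr c ∧ pvOpen land n m c ∧ R c = r)
    (Classical.decPred _) (pvGrid n m)

theorem mem_pvSSet (land : List (List Int)) (n m : Int)
    (R : (Int × Int) → (Int × Int)) (Pr : (Int × Int) → Prop) (r c : Int × Int) :
    c ∈ pvSSet land n m R Pr r ↔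
      pvInG n m c ∧ Pr c ∧ pvOpen land n m c ∧ R c = r := by
  unfold pvSSet
  rw [@Finset.mem_filter _ _ (Classical.decPred _), mem_pvGrid]

def pvSInv (land : List (List Int)) (n m : Int) (R : (Int × Int) → (Int × Int))
    (Pr : (Int × Int) → Prop) (s : PySem.Dict (Int × Int) (Int × Int × Int)) : Prop :=
  s.keys.Nodup ∧
  (∀ r, s.contains r = true ↔ ∃ c, Pr c ∧ pvOpen land n m c ∧ R c = r) ∧
  (∀ r v, s.get? r = some v →
    v.1 = ((pvSSet land n m R Pr r).card : Int) ∧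
    (∃ c ∈ pvSSet land n m R Pr r, v.2.1 = c.2) ∧
    (∀ c ∈ pvSSet land n m R Pr r, v.2.1 ≤ c.2) ∧
    (∃ c ∈ pvSSet land n m R Pr r, v.2.2 = c.2) ∧
    (∀ c ∈ pvSSet land n m R Pr r, c.2 ≤ v.2.2))

theorem pvSSet_congr (land : List (List Int)) (n m : Int)
    (R : (Int × Int) → (Int × Int)) (Pr1 Pr2 : (Int × Int) → Prop)
    (h : ∀ c, pvOpen land n m c → (Pr1 c ↔ Pr2 c)) (r : Int × Int) :
    pvSSet land n m R Pr1 r = pvSSet land n m R Pr2 r := by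
  ext c
  rw [mem_pvSSet, mem_pvSSet]
  constructor
  · rintro ⟨a, b, c', d⟩
    exact ⟨a, (h _ c').mp b, c', d⟩
  · rintro ⟨a, b, c', d⟩
    exact ⟨a, (h _ c').mpr b, c', d⟩

theorem pvSInv_congr (land : List (List Int)) (n m : Int)
    (R : (Int × Int) → (Int × Int)) (Pr1 Pr2 : (Int × Int) → Prop)
    (h : ∀ c, pvOpen land n m c → (Pr1 c ↔ Pr2 c))
    (s : PySem.Dict (Int × Int) (Int × Int × Int))
    (hinv : pvSInv land n m R Pr1 s) : pvSInv land n m R Pr2 s := by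
  obtain ⟨h1, h2, h3⟩ := hinv
  refine ⟨h1, ?_, ?_⟩
  · intro r
    rw [h2 r]
    constructor
    · rintro ⟨c, hc1, hc2, hc3⟩
      exact ⟨c, (h c hc2).mp hc1, hc2, hc3⟩
    · rintro ⟨c, hc1, hc2, hc3⟩
      exact ⟨c, (h c hc2).mpr hc1, hc2, hc3⟩
  · intro r v hv
    rw [← pvSSet_congr land n m R Pr1 Pr2 h r]
    exact h3 r v hv

theorem pvSStep (land : List (List Int)) (n m : Int)
    (R : (Int × Int) → (Int × Int)) (Pr : (Int × Int) → Prop)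
    (s : PySem.Dict (Int × Int) (Int × Int × Int)) (X y : Int)
    (hX : 0 ≤ X) (hXn : X < n) (hy : 0 ≤ y) (hym : y < m)
    (hnew : ¬ Pr (X, y))
    (hinv : pvSInv land n m R Pr s) :
    pvSInv land n m R (fun c => Pr c ∨ c = (X, y))
      (if cellD land X y ≠ 0 then
        (match s.get? (R (X, y)) with
          | some t => s.insert (R (X, y)) (t.1 + 1, min t.2.1 y, max t.2.2 y)
          | none => s.insert (R (X, y)) (1, y, y))
       else s) := by
  obtain ⟨h1, h2, h3⟩ := hinv
  by_cases hz : cellD land X y ≠ 0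
  · simp only [if_pos hz]
    have hop : pvOpen land n m (X, y) := ⟨⟨hX, hXn, hy, hym⟩, hz⟩
    have hnotmem : ∀ r, ((X, y) : Int × Int) ∉ pvSSet land n m R Pr r := by
      intro r hmem
      exact hnew ((mem_pvSSet land n m R Pr r _).mp hmem).2.1
    have hsset0 : pvSSet land n m R (fun c => Pr c ∨ c = (X, y)) (R (X, y)) =
        insert ((X, y) : Int × Int) (pvSSet land n m R Pr (R (X, y))) := by
      ext c
      rw [mem_pvSSet, Finset.mem_insert, mem_pvSSet]
      constructor
      · rintro ⟨a, (b | b), c', d⟩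
        · exact Or.inr ⟨a, b, c', d⟩
        · exact Or.inl b
      · rintro (rfl | ⟨a, b, c', d⟩)
        · exact ⟨hop.1, Or.inr rfl, hop, rfl⟩
        · exact ⟨a, Or.inl b, c', d⟩
    have hsset_ne : ∀ r, r ≠ R (X, y) →
        pvSSet land n m R (fun c => Pr c ∨ c = (X, y)) r =
          pvSSet land n m R Pr r := by
      intro r hr
      ext c
      rw [mem_pvSSet, mem_pvSSet]
      constructor
      · rintro ⟨a, (b | rfl), c', d⟩
        · exact ⟨a, b, c', d⟩
        · exact absurd d.symm hr
      · rintro ⟨a, b, c', d⟩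
        exact ⟨a, Or.inl b, c', d⟩
    have hcont : ∀ (w : Int × Int × Int),
        (∀ r, (s.insert (R (X, y)) w).contains r = true ↔
          ∃ c, (Pr c ∨ c = (X, y)) ∧ pvOpen land n m c ∧ R c = r) := by
      intro w r
      rw [PySem.Dict.contains_insert]
      by_cases hr : r = R (X, y)
      · subst hr
        simp only [beq_self_eq_true, Bool.true_or, true_iff]
        exact ⟨(X, y), Or.inr rfl, hop, rfl⟩
      · rw [show (r == R (X, y)) = false from
          beq_eq_false_iff_ne.mpr hr, Bool.false_or, h2 r]
        constructor
        · rintro ⟨c, hc1, hc2, hc3⟩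
          exact ⟨c, Or.inl hc1, hc2, hc3⟩
        · rintro ⟨c, (hc1 | rfl), hc2, hc3⟩
          · exact ⟨c, hc1, hc2, hc3⟩
          · exact absurd hc3.symm hr
    rcases hg : s.get? (R (X, y)) with _ | t
    · have hempty : pvSSet land n m R Pr (R (X, y)) = ∅ := by
        have hcf : s.contains (R (X, y)) = false := by
          rw [PySem.Dict.contains_eq_isSome_get?, hg]
          rfl
        ext c
        rw [mem_pvSSet]
        simp only [Finset.notMem_empty, iff_false]
        rintro ⟨a, b, c', d⟩
        have : s.contains (R (X, y)) = true := (h2 _).mpr ⟨c, b, c', d⟩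
        rw [hcf] at this
        cases this
      refine ⟨PySem.Dict.nodup_keys_insert _ _ _ h1, hcont _, ?_⟩
      intro r v hv
      rw [PySem.Dict.get?_insert] at hv
      by_cases hr : r = R (X, y)
      · rw [if_pos hr] at hv
        cases hv
        rw [hr, hsset0, hempty]
        refine ⟨by simp, ⟨(X, y), by simp, rfl⟩, ?_, ⟨(X, y), by simp, rfl⟩, ?_⟩
        · intro c hc
          simp only [insert_empty_eq, Finset.mem_singleton] at hc
          subst hc
          exact le_refl _
        · intro c hc
          simp only [insert_empty_eq, Finset.mem_singleton] at hc
          subst hc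
          exact le_refl _
      · rw [if_neg hr] at hv
        rw [hsset_ne r hr]
        exact h3 r v hv
    · obtain ⟨o1, o2, o3, o4, o5⟩ := h3 (R (X, y)) t hg
      refine ⟨PySem.Dict.nodup_keys_insert _ _ _ h1, hcont _, ?_⟩
      intro r v hv
      rw [PySem.Dict.get?_insert] at hv
      by_cases hr : r = R (X, y)
      · rw [if_pos hr] at hv
        cases hv
        rw [hr, hsset0]
        refine ⟨?_, ?_, ?_, ?_, ?_⟩
        · rw [Finset.card_insert_of_notMem (hnotmem _), o1]
          push_cast
          ring
        · rcases min_choice t.2.1 y with h | h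
          · obtain ⟨c0, hc0, he⟩ := o2
            exact ⟨c0, Finset.mem_insert_of_mem hc0, by rw [h, he]⟩
          · exact ⟨(X, y), Finset.mem_insert_self _ _, by rw [h]⟩
        · intro c hc
          rcases Finset.mem_insert.mp hc with rfl | hc
          · exact min_le_right _ _
          · exact le_trans (min_le_left _ _) (o3 c hc)
        · rcases max_choice t.2.2 y with h | h
          · obtain ⟨c0, hc0, he⟩ := o4
            exact ⟨c0, Finset.mem_insert_of_mem hc0, by rw [h, he]⟩
          · exact ⟨(X, y), Finset.mem_insert_self _ _, by rw [h]⟩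
        · intro c hc
          rcases Finset.mem_insert.mp hc with rfl | hc
          · exact le_max_right _ _
          · exact le_trans (o5 c hc) (le_max_left _ _)
      · rw [if_neg hr] at hv
        rw [hsset_ne r hr]
        exact h3 r v hv
  · simp only [if_neg hz]
    refine pvSInv_congr land n m R Pr _ ?_ s ⟨h1, h2, h3⟩
    intro c hc
    constructor
    · exact Or.inl
    · rintro (h | rfl)
      · exact h
      · exact absurd hc.2 hz

theorem pvStats_inv (land : List (List Int)) (n m : Int) (hn : 0 ≤ n) (hm : 0 ≤ m)
    (P : PySem.Dict (Int × Int) (Int × Int)) :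
    pvSInv land n m (pvRootF n m P) (fun _ => True)
      (pvStats land n m (n.toNat * m.toNat + 1) P) := by
  have main := pvRangeInd
    (fun s x =>
      (PySem.List.pyRange 0 m 1).foldl (fun s y =>
        if cellD land x y ≠ 0 then
          let r := pvFind P (n.toNat * m.toNat + 1) (x, y)
          match s.get? r with
          | some t => s.insert r (t.1 + 1, min t.2.1 y, max t.2.2 y)
          | none => s.insert r (1, y, y)
        else s) s)
    (fun x s => pvSInv land n m (pvRootF n m P) (fun c => c.1 < x) s)
    0 n
    (by
      intro X s hX hXn hQ
      have inner := pvRangeInd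
        (fun s y =>
          if cellD land X y ≠ 0 then
            let r := pvFind P (n.toNat * m.toNat + 1) (X, y)
            match s.get? r with
            | some t => s.insert r (t.1 + 1, min t.2.1 y, max t.2.2 y)
            | none => s.insert r (1, y, y)
          else s)
        (fun y s => pvSInv land n m (pvRootF n m P)
          (fun c => c.1 < X ∨ (c.1 = X ∧ c.2 < y)) s)
        0 m
        (by
          intro y s hy hym hQ'
          have step := pvSStep land n m (pvRootF n m P)
            (fun c => c.1 < X ∨ (c.1 = X ∧ c.2 < y)) s X y hX hXn hy hym
            (by omega) hQ'
          refine pvSInv_congr land n m (pvRootF n m P) _ _ ?_ _ step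
          intro c _
          constructor
          · rintro ((h | ⟨h1, h2⟩) | rfl)
            · exact Or.inl h
            · exact Or.inr ⟨h1, by omega⟩
            · exact Or.inr ⟨rfl, by omega⟩
          · rintro (h | ⟨h1, h2⟩)
            · exact Or.inl (Or.inl h)
            · by_cases hcy : c.2 = y
              · exact Or.inr (Prod.ext h1 hcy)
              · exact Or.inl (Or.inr ⟨h1, by omega⟩))
        m.toNat 0 s (le_refl 0) hm (by omega)
        (by
          refine pvSInv_congr land n m (pvRootF n m P) _ _ ?_ _ hQ
          intro c hc
          constructor
          · exact fun h => Or.inl h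
          · rintro (h | ⟨_, h2⟩)
            · exact h
            · exfalso
              obtain ⟨⟨_, _, h3, _⟩, _⟩ := hc
              omega)
      refine pvSInv_congr land n m (pvRootF n m P) _ _ ?_ _ inner
      intro c hc
      constructor
      · rintro (h | ⟨h1, _⟩)
        · omega
        · omega
      · intro h
        by_cases hcx : c.1 = X
        · obtain ⟨⟨_, _, _, h4⟩, _⟩ := hc
          exact Or.inr ⟨hcx, h4⟩
        · exact Or.inl (by omega))
    n.toNat 0 PySem.Dict.empty (le_refl 0) hn (by omega)
    (by
      refine ⟨by simp [PySem.Dict.keys_empty], ?_, ?_⟩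
      · intro r
        rw [PySem.Dict.contains_empty]
        constructor
        · intro h
          cases h
        · rintro ⟨c, hc1, hc2, _⟩
          exfalso
          obtain ⟨⟨h1, _, _, _⟩, _⟩ := hc2
          omega
      · intro r v hv
        rw [PySem.Dict.get?_empty] at hv
        cases hv)
  have final := pvSInv_congr land n m (pvRootF n m P) (fun c => c.1 < n)
    (fun _ => True)
    (by
      intro c hc
      obtain ⟨⟨_, h2, _, _⟩, _⟩ := hc
      simp [h2]) _ main
  exact final

theorem pvPairwise_of_nodup {α : Type} (Rl : α → α → Prop) :
    ∀ l : List α, l.Nodup → (∀ a ∈ l, ∀ b ∈ l, a ≠ b → Rl a b) → l.Pairwise Rl := by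
  intro l
  induction l with
  | nil =>
    intro _ _
    exact List.Pairwise.nil
  | cons a t ih =>
    intro hnd h
    rw [List.pairwise_cons]
    obtain ⟨hna, hndt⟩ := List.nodup_cons.mp hnd
    constructor
    · intro b hb
      refine h a (List.mem_cons_self ..) b (List.mem_cons_of_mem _ hb) ?_
      intro he
      exact hna (he ▸ hb)
    · exact ih hndt (fun x hx y hy => h x (List.mem_cons_of_mem _ hx)
        y (List.mem_cons_of_mem _ hy))

theorem pvSumFilterMap (col : Int) :
    ∀ l : List (Int × Int × Int),
      ((l.filter (fun t => decide (t.2.1 ≤ col ∧ col ≤ t.2.2))).map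
        (fun t => t.1)).sum =
      (l.map (fun t => if t.2.1 ≤ col ∧ col ≤ t.2.2 then t.1 else 0)).sum := by
  intro l
  induction l with
  | nil => rfl
  | cons a t ih =>
    rw [List.filter_cons, List.map_cons, List.sum_cons]
    by_cases h : a.2.1 ≤ col ∧ col ≤ a.2.2
    · rw [if_pos (by simpa using h), List.map_cons, List.sum_cons, ih, if_pos h]
    · rw [if_neg (by simpa using h), ih, if_neg h]
      omega

theorem pvB_char (land : List (List Int)) (n m : Int) (hn : 0 ≤ n) (hm : 0 ≤ m) :
    ∃ reps : List (Int × Int), pvGoodReps land n m reps ∧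
      ∀ col : Int,
        (((pvStats land n m (n.toNat * m.toNat + 1)
            ((PySem.List.pyRange 0 n 1).foldl (fun P x =>
              (PySem.List.pyRange 0 m 1).foldl (fun P y =>
                if cellD land x y = 0 then P
                else pvUnion land n m (n.toNat * m.toNat + 1) P x y) P)
              (pvParent0 land n m))).values.filter
            (fun t => decide (t.2.1 ≤ col ∧ col ≤ t.2.2))).map (fun t => t.1)).sum =
          (reps.map (fun r => gF (compF land n m r) col)).sum := by
  obtain ⟨hW, hpairs⟩ := pvUnionPhase land n m hn hm
  set P := ((PySem.List.pyRange 0 n 1).foldl (fun P x =>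
    (PySem.List.pyRange 0 m 1).foldl (fun P y =>
      if cellD land x y = 0 then P
      else pvUnion land n m (n.toNat * m.toNat + 1) P x y) P)
    (pvParent0 land n m)) with hPdef
  have hconst := pvRoot_const land n m P hW hpairs
  obtain ⟨snd, scont, sval⟩ := pvStats_inv land n m hn hm P
  set stats := pvStats land n m (n.toNat * m.toNat + 1) P with hstats
  have hkey : ∀ r ∈ stats.keys, pvOpen land n m r ∧ pvRootF n m P r = r := by
    intro r hr
    have hc : stats.contains r = true := (PySem.Dict.contains_iff_mem_keys _ _).mpr hr
    obtain ⟨c, _, hco, hcr⟩ := (scont r).mp hc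
    have hfix := pvRoot_fix land n m P hW c hco
    constructor
    · rw [← hcr]
      exact hfix.2.1
    · rw [← hcr]
      exact pvRoot_idem land n m P hW c hco
  have hclass : ∀ r, pvOpen land n m r → pvRootF n m P r = r →
      pvSSet land n m (pvRootF n m P) (fun _ => True) r = compF land n m r := by
    intro r hro hrr
    ext c
    rw [mem_pvSSet, mem_compF]
    constructor
    · rintro ⟨hg, _, hco, hcr⟩
      have := (pvRoot_fix land n m P hW c hco).2.2
      rw [hcr] at this
      exact ⟨hg, pvR_symm land n m c r hco this⟩
    · rintro ⟨hg, hR⟩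
      have hco : pvOpen land n m c := pvR_open land n m r c hro hR
      have := hconst r c hro hR
      rw [hrr] at this
      exact ⟨hg, trivial, hco, this.symm⟩
  have hgood : pvGoodReps land n m stats.keys := by
    refine ⟨fun r hr => (hkey r hr).1, ?_, ?_⟩
    · refine pvPairwise_of_nodup _ stats.keys snd ?_
      intro a ha b hb hne hR
      have hae := (hkey a ha).2
      have hbe := (hkey b hb).2
      have := hconst a b (hkey a ha).1 hR
      rw [hae, hbe] at this
      exact hne this
    · intro c hco
      have hfix := pvRoot_fix land n m P hW c hco
      refine ⟨pvRootF n m P c, ?_, ?_⟩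
      · exact (PySem.Dict.contains_iff_mem_keys _ _).mp
          ((scont _).mpr ⟨c, trivial, hco, rfl⟩)
      · exact pvR_symm land n m c _ hco hfix.2.2
  refine ⟨stats.keys, hgood, ?_⟩
  intro col
  rw [pvSumFilterMap col]
  rw [PySem.Dict.values_eq_map_keys stats snd (0, 0, 0), List.map_map]
  refine congrArg List.sum (List.map_congr_left ?_)
  intro r hr
  obtain ⟨hro, hrr⟩ := hkey r hr
  have hc : stats.contains r = true := (PySem.Dict.contains_iff_mem_keys _ _).mpr hr
  rw [PySem.Dict.contains_eq_isSome_get?] at hc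
  obtain ⟨v, hv⟩ := Option.isSome_iff_exists.mp hc
  have hgetD : stats.getD r (0, 0, 0) = v :=
    PySem.Dict.getD_of_get?_eq_some stats (0, 0, 0) hv
  obtain ⟨o1, o2, o3, o4, o5⟩ := sval r v hv
  rw [hclass r hro hrr] at o1 o2 o3 o4 o5
  simp only [Function.comp_apply, hgetD]
  exact gF_of_bounds (compF land n m r) v.1 v.2.1 v.2.2 o1 o2 o3 o4 o5 col

-- ——— A-side: one BFS discovers exactly one component ———

theorem pvReachV_not (V : (Int × Int) → Prop) (land : List (List Int)) (n m : Int)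
    (s : Int × Int) (hs : ¬ V s) :
    ∀ c, pvReach land n m V s c → ¬ V c := by
  intro c h
  induction h with
  | base => exact hs
  | step _ _ _ h4 _ => exact h4

theorem pvR_to_reachV (land : List (List Int)) (n m : Int) (S : Finset (Int × Int))
    (hScl : ∀ c ∈ S, ∀ d ∈ pvNbrs c, pvOpen land n m d → d ∈ S)
    (s : Int × Int) (hso : pvOpen land n m s) (hs : s ∉ S) :
    ∀ c, pvR land n m s c → pvReach land n m (· ∈ S) s c := by
  intro c h
  induction h with
  | base => exact pvReach.base
  | @step c' d' h1 h2 h3 _ ih =>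
    refine pvReach.step ih h2 h3 ?_
    intro hdS
    have hc'op : pvOpen land n m c' :=
      pvR_open land n m s c' hso (pvR_of_reach land n m _ s c' ih)
    have hc'S : c' ∉ S := pvReachV_not (· ∈ S) land n m s hs c' ih
    exact hc'S (hScl d' hdS c' ((pvNbrs_symm _ _).mpr h2) hc'op)

theorem pvStartA (land : List (List Int)) (n m : Int) (vis : List (List Bool))
    (VisS : Finset (Int × Int)) (s : Int × Int)
    (hs : pvShape n m vis)
    (hrel : ∀ c : Int × Int, pvInG n m c → (pvVisGet vis c.1 c.2 = true ↔ c ∈ VisS))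
    (hScl : ∀ c ∈ VisS, ∀ d ∈ pvNbrs c, pvOpen land n m d → d ∈ VisS)
    (hg : pvInG n m s) (hnz : cellD land s.1 s.2 ≠ 0) (hsV : s ∉ VisS) :
    pvShape n m (pvBfsLoop land n m (n.toNat * m.toNat + 1) [s]
        (pvVisSet vis s.1 s.2) 0 s.2 s.2).1 ∧
    (∀ c : Int × Int, pvInG n m c →
      ((pvVisGet (pvBfsLoop land n m (n.toNat * m.toNat + 1) [s]
          (pvVisSet vis s.1 s.2) 0 s.2 s.2).1 c.1 c.2 = true) ↔
        c ∈ VisS ∨ c ∈ compF land n m s)) ∧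
    (pvBfsLoop land n m (n.toNat * m.toNat + 1) [s]
      (pvVisSet vis s.1 s.2) 0 s.2 s.2).2.1 = ((compF land n m s).card : Int) ∧
    (∃ c ∈ compF land n m s, (pvBfsLoop land n m (n.toNat * m.toNat + 1) [s]
      (pvVisSet vis s.1 s.2) 0 s.2 s.2).2.2.1 = c.2) ∧
    (∀ c ∈ compF land n m s, (pvBfsLoop land n m (n.toNat * m.toNat + 1) [s]
      (pvVisSet vis s.1 s.2) 0 s.2 s.2).2.2.1 ≤ c.2) ∧
    (∃ c ∈ compF land n m s, (pvBfsLoop land n m (n.toNat * m.toNat + 1) [s]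
      (pvVisSet vis s.1 s.2) 0 s.2 s.2).2.2.2 = c.2) ∧
    (∀ c ∈ compF land n m s, c.2 ≤ (pvBfsLoop land n m (n.toNat * m.toNat + 1) [s]
      (pvVisSet vis s.1 s.2) 0 s.2 s.2).2.2.2) := by
  obtain ⟨g1, g2, g3, g4⟩ := hg
  have hso : pvOpen land n m s := ⟨⟨g1, g2, g3, g4⟩, hnz⟩
  have hs0 : pvShape n m (pvVisSet vis s.1 s.2) :=
    pvShape_visSet n m vis s.1 s.2 hs g1 g2 g3 g4
  have hsgrid : s ∈ pvGrid n m := (mem_pvGrid n m s).mpr ⟨g1, g2, g3, g4⟩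
  obtain ⟨E, hDE, p1, p2, p3, p4, p5, p6, p7, p8, ⟨p9a, p9b⟩, ⟨p10a, p10b⟩⟩ :=
    pvBfsLoop_spec land n m s (· ∈ VisS) (n.toNat * m.toNat + 1) [s]
      (pvVisSet vis s.1 s.2) 0 s.2 s.2 {s}
      hs0
      (by
        rintro ⟨a, b⟩ ⟨w1, w2, w3, w4⟩
        rw [pvVisGet_visSet n m vis s.1 s.2 a b hs g1 g2 g3 g4 w1 w2 w3 w4]
        rw [Finset.mem_singleton]
        by_cases hab : a = s.1 ∧ b = s.2
        · obtain ⟨hab1, hab2⟩ := hab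
          subst hab1
          subst hab2
          rw [if_pos ⟨rfl, rfl⟩]
          simp
        · rw [if_neg hab]
          rw [hrel (a, b) ⟨w1, w2, w3, w4⟩]
          constructor
          · exact Or.inl
          · rintro (h | h)
            · exact h
            · exact absurd ⟨congrArg Prod.fst h, congrArg Prod.snd h⟩ hab)
      (by
        intro c hc
        rw [Finset.mem_singleton] at hc
        subst hc
        exact hsV)
      (by
        intro c hc
        rw [Finset.mem_singleton] at hc
        subst hc
        exact ⟨g1, g2, g3, g4⟩)
      (List.nodup_singleton s)
      (by
        intro c hc
        rw [Finset.mem_singleton]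
        simpa using hc)
      (by
        intro c hc hnq
        rw [Finset.mem_singleton] at hc
        subst hc
        exact absurd (List.mem_singleton_self _) hnq)
      (by
        intro c hc
        rw [Finset.mem_singleton] at hc
        subst hc
        exact pvReach.base)
      (Finset.mem_singleton_self s)
      (by simp)
      ⟨s, Finset.mem_singleton_self s, rfl⟩
      (by
        intro c hc hnq
        rw [Finset.mem_singleton] at hc
        subst hc
        exact absurd (List.mem_singleton_self _) hnq)
      ⟨s, Finset.mem_singleton_self s, rfl⟩
      (by
        intro c hc hnq
        rw [Finset.mem_singleton] at hc
        subst hc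
        exact absurd (List.mem_singleton_self _) hnq)
      (by
        have hsub : (pvGrid n m).filter
            (fun c => pvVisGet (pvVisSet vis s.1 s.2) c.1 c.2 = false) ⊆
            (pvGrid n m).erase s := by
          intro c hc
          rw [Finset.mem_filter] at hc
          rw [Finset.mem_erase]
          refine ⟨?_, hc.1⟩
          intro hcs
          subst hcs
          obtain ⟨w1, w2, w3, w4⟩ := (mem_pvGrid n m c).mp hc.1
          rw [pvVisGet_visSet n m vis c.1 c.2 c.1 c.2 hs g1 g2 g3 g4
            w1 w2 w3 w4] at hc
          simp at hc
        have h1 := Finset.card_le_card hsub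
        rw [Finset.card_erase_of_mem hsgrid, card_pvGrid] at h1
        have h2 : 0 < (pvGrid n m).card := Finset.card_pos.mpr ⟨s, hsgrid⟩
        rw [card_pvGrid] at h2
        simp only [List.length_singleton]
        omega)
  have hEC : E = compF land n m s := by
    ext c
    rw [mem_compF]
    constructor
    · intro hc
      exact ⟨p4 c hc, pvR_of_reach land n m _ s c (p6 c hc)⟩
    · rintro ⟨hcg, hR⟩
      have hreachV := pvR_to_reachV land n m VisS hScl s hso hsV c hR
      exact pvReach_subset land n m (· ∈ VisS) s (· ∈ E) p5
        (fun c' hc' d hd hop hV => p7 c' hc' d hd hop hV) c hreachV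
  rw [hEC] at p2 p8 p9a p9b p10a p10b
  exact ⟨p1, p2, p8, p9a, p9b, p10a, p10b⟩

-- ——— A-side: the scan invariant ———

def pvAInv (land : List (List Int)) (n m : Int) (Pr : (Int × Int) → Prop)
    (st : List (List Bool) × List Int) : Prop :=
  ∃ VisS : Finset (Int × Int), ∃ reps : List (Int × Int),
    pvShape n m st.1 ∧
    (∀ c : Int × Int, pvInG n m c → (pvVisGet st.1 c.1 c.2 = true ↔ c ∈ VisS)) ∧
    (∀ c ∈ VisS, pvOpen land n m c) ∧
    (∀ c ∈ VisS, ∀ d ∈ pvNbrs c, pvOpen land n m d → d ∈ VisS) ∧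
    (∀ c : Int × Int, pvOpen land n m c → Pr c → c ∈ VisS) ∧
    (∀ r ∈ reps, pvOpen land n m r) ∧
    (∀ r ∈ reps, r ∈ VisS) ∧
    List.Pairwise (fun a b => ¬ pvR land n m a b) reps ∧
    (∀ c ∈ VisS, ∃ r ∈ reps, pvR land n m r c) ∧
    st.2.length = m.toNat ∧
    (∀ k : Nat, k < m.toNat → st.2.getD k 0 =
      (reps.map (fun r => gF (compF land n m r) (k : Int))).sum)

theorem pvAInv_congr (land : List (List Int)) (n m : Int)
    (Pr1 Pr2 : (Int × Int) → Prop)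
    (h : ∀ c, pvOpen land n m c → (Pr1 c ↔ Pr2 c))
    (st : List (List Bool) × List Int)
    (hinv : pvAInv land n m Pr1 st) : pvAInv land n m Pr2 st := by
  obtain ⟨V, reps, a1, a2, a3, a4, a5, a6, a7, a8, a9, a10, a11⟩ := hinv
  exact ⟨V, reps, a1, a2, a3, a4,
    fun c hco hp => a5 c hco ((h c hco).mpr hp), a6, a7, a8, a9, a10, a11⟩

theorem pvAStep (land : List (List Int)) (n m : Int) (Pr : (Int × Int) → Prop)
    (st : List (List Bool) × List Int) (x y : Int)
    (hx : 0 ≤ x) (hxn : x < n) (hy : 0 ≤ y) (hym : y < m)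
    (hinv : pvAInv land n m Pr st) :
    pvAInv land n m (fun c => Pr c ∨ c = (x, y))
      (if pvVisGet st.1 x y = true then st
       else if cellD land x y = 0 then st
       else pvBfs land n m st.1 st.2 (x, y)) := by
  obtain ⟨VisS, reps, a1, a2, a3, a4, a5, a6, a7, a8, a9, a10, a11⟩ := hinv
  by_cases hvis : pvVisGet st.1 x y = true
  · rw [if_pos hvis]
    refine ⟨VisS, reps, a1, a2, a3, a4, ?_, a6, a7, a8, a9, a10, a11⟩
    intro c hco hp
    rcases hp with hp | rfl
    · exact a5 c hco hp
    · exact (a2 (x, y) ⟨hx, hxn, hy, hym⟩).mp hvis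
  · rw [if_neg hvis]
    by_cases hz : cellD land x y = 0
    · rw [if_pos hz]
      refine ⟨VisS, reps, a1, a2, a3, a4, ?_, a6, a7, a8, a9, a10, a11⟩
      intro c hco hp
      rcases hp with hp | rfl
      · exact a5 c hco hp
      · exact absurd hco.2 (by simp [hz])
    · rw [if_neg hz]
      have hg : pvInG n m ((x, y) : Int × Int) := ⟨hx, hxn, hy, hym⟩
      have hso : pvOpen land n m (x, y) := ⟨hg, hz⟩
      have hsV : ((x, y) : Int × Int) ∉ VisS := by
        intro hmem
        exact hvis ((a2 (x, y) hg).mpr hmem)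
      obtain ⟨q1, q2, q3, q4, q5, q6, q7⟩ :=
        pvStartA land n m st.1 VisS (x, y) a1 a2 a4 hg hz hsV
      have hCopen : ∀ c ∈ compF land n m ((x, y) : Int × Int), pvOpen land n m c := by
        intro c hc
        obtain ⟨hcg, hR⟩ := (mem_compF land n m _ c).mp hc
        exact pvR_open land n m _ c hso hR
      have hCR : ∀ c ∈ compF land n m ((x, y) : Int × Int), pvR land n m (x, y) c := by
        intro c hc
        exact ((mem_compF land n m _ c).mp hc).2
      have hsC : ((x, y) : Int × Int) ∈ compF land n m ((x, y) : Int × Int) :=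
        self_mem_compF land n m _ hso
      -- bounds needed for the result update
      have hlo0 : 0 ≤ (pvBfsLoop land n m (n.toNat * m.toNat + 1)
          [((x, y) : Int × Int)]
          (pvVisSet st.1 ((x, y) : Int × Int).1 ((x, y) : Int × Int).2) 0
          ((x, y) : Int × Int).2 ((x, y) : Int × Int).2).2.2.1 := by
        obtain ⟨c0, hc0, hlo⟩ := q4
        obtain ⟨⟨_, _, h3, _⟩, _⟩ := (mem_compF land n m _ c0).mp hc0
        omega
      have hhiU : (pvBfsLoop land n m (n.toNat * m.toNat + 1)
          [((x, y) : Int × Int)]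
          (pvVisSet st.1 ((x, y) : Int × Int).1 ((x, y) : Int × Int).2) 0
          ((x, y) : Int × Int).2 ((x, y) : Int × Int).2).2.2.2 <
          (st.2.length : Int) := by
        obtain ⟨c1, hc1, hhi⟩ := q6
        obtain ⟨⟨_, _, _, h4⟩, _⟩ := (mem_compF land n m _ c1).mp hc1
        omega
      have hupd := pvResultUpdate
        (pvBfsLoop land n m (n.toNat * m.toNat + 1) [((x, y) : Int × Int)]
          (pvVisSet st.1 ((x, y) : Int × Int).1 ((x, y) : Int × Int).2) 0
          ((x, y) : Int × Int).2 ((x, y) : Int × Int).2).2.1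
        (pvBfsLoop land n m (n.toNat * m.toNat + 1) [((x, y) : Int × Int)]
          (pvVisSet st.1 ((x, y) : Int × Int).1 ((x, y) : Int × Int).2) 0
          ((x, y) : Int × Int).2 ((x, y) : Int × Int).2).2.2.2
        (((pvBfsLoop land n m (n.toNat * m.toNat + 1) [((x, y) : Int × Int)]
          (pvVisSet st.1 ((x, y) : Int × Int).1 ((x, y) : Int × Int).2) 0
          ((x, y) : Int × Int).2 ((x, y) : Int × Int).2).2.2.2 + 1 -
          (pvBfsLoop land n m (n.toNat * m.toNat + 1) [((x, y) : Int × Int)]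
          (pvVisSet st.1 ((x, y) : Int × Int).1 ((x, y) : Int × Int).2) 0
          ((x, y) : Int × Int).2 ((x, y) : Int × Int).2).2.2.1).toNat)
        (pvBfsLoop land n m (n.toNat * m.toNat + 1) [((x, y) : Int × Int)]
          (pvVisSet st.1 ((x, y) : Int × Int).1 ((x, y) : Int × Int).2) 0
          ((x, y) : Int × Int).2 ((x, y) : Int × Int).2).2.2.1
        st.2 (le_refl _) hlo0 hhiU
      refine ⟨VisS ∪ compF land n m ((x, y) : Int × Int),
        reps ++ [((x, y) : Int × Int)], q1, ?_, ?_, ?_, ?_, ?_, ?_, ?_, ?_, ?_, ?_⟩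
      · intro c hc
        rw [Finset.mem_union]
        exact q2 c hc
      · intro c hc
        rcases Finset.mem_union.mp hc with h | h
        · exact a3 c h
        · exact hCopen c h
      · intro c hc d hd hop
        rcases Finset.mem_union.mp hc with h | h
        · exact Finset.mem_union_left _ (a4 c h d hd hop)
        · refine Finset.mem_union_right _ ?_
          rw [mem_compF]
          exact ⟨hop.1, pvReach.step (hCR c h) hd hop (by simp)⟩
      · intro c hco hp
        rcases hp with hp | rfl
        · exact Finset.mem_union_left _ (a5 c hco hp)
        · exact Finset.mem_union_right _ hsC
      · intro r hr
        rcases List.mem_append.mp hr with h | h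
        · exact a6 r h
        · rw [List.mem_singleton.mp h]
          exact hso
      · intro r hr
        rcases List.mem_append.mp hr with h | h
        · exact Finset.mem_union_left _ (a7 r h)
        · rw [List.mem_singleton.mp h]
          exact Finset.mem_union_right _ hsC
      · rw [List.pairwise_append]
        refine ⟨a8, List.pairwise_singleton _ _, ?_⟩
        intro a ha b hb
        rw [List.mem_singleton.mp hb]
        intro hR
        exact hsV (pvReach_subset land n m (fun _ => False) a (· ∈ VisS)
          (a7 a ha) (fun c' hc' d hd hop _ => a4 c' hc' d hd hop) (x, y) hR)
      · intro c hc
        rcases Finset.mem_union.mp hc with h | h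
        · obtain ⟨r0, hr0, hR0⟩ := a9 c h
          exact ⟨r0, List.mem_append_left _ hr0, hR0⟩
        · exact ⟨(x, y), List.mem_append_right _ (List.mem_singleton_self _),
            hCR c h⟩
      · exact hupd.1.trans a10
      · intro k hk
        have hk' : k < st.2.length := by omega
        have hbfs2 : (pvBfs land n m st.1 st.2 (x, y)).2 =
            (PySem.List.pyRange
              (pvBfsLoop land n m (n.toNat * m.toNat + 1) [((x, y) : Int × Int)]
                (pvVisSet st.1 ((x, y) : Int × Int).1 ((x, y) : Int × Int).2) 0
                ((x, y) : Int × Int).2 ((x, y) : Int × Int).2).2.2.1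
              ((pvBfsLoop land n m (n.toNat * m.toNat + 1) [((x, y) : Int × Int)]
                (pvVisSet st.1 ((x, y) : Int × Int).1 ((x, y) : Int × Int).2) 0
                ((x, y) : Int × Int).2 ((x, y) : Int × Int).2).2.2.2 + 1) 1).foldl
              (fun res i => PySem.List.pySetD res i (PySem.List.pyGetD res i 0 +
                (pvBfsLoop land n m (n.toNat * m.toNat + 1) [((x, y) : Int × Int)]
                  (pvVisSet st.1 ((x, y) : Int × Int).1 ((x, y) : Int × Int).2) 0
                  ((x, y) : Int × Int).2 ((x, y) : Int × Int).2).2.1)) st.2 := rfl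
        rw [hbfs2]
        have := hupd.2 k hk'
        rw [this, a11 k hk, List.map_append, List.sum_append]
        simp only [List.map_cons, List.map_nil, List.sum_cons, List.sum_nil, add_zero]
        congr 1
        exact gF_of_bounds (compF land n m ((x, y) : Int × Int)) _ _ _ q3 q4 q5 q6 q7
          (k : Int)

theorem pvA_init (land : List (List Int)) (n m : Int) :
    pvAInv land n m (fun c => c.2 < 0)
      ((PySem.List.pyRange 0 n 1).map
        (fun _ => (PySem.List.pyRange 0 m 1).map (fun _ => false)),
       (PySem.List.pyRange 0 m 1).map (fun _ => (0 : Int))) := by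
  have hshape : pvShape n m ((PySem.List.pyRange 0 n 1).map
      (fun _ => (PySem.List.pyRange 0 m 1).map (fun _ => false))) := by
    constructor
    · rw [List.length_map, PySem.List.length_pyRange_one]
      simp
    · intro row hrow
      obtain ⟨_, _, hrow⟩ := List.mem_map.mp hrow
      rw [← hrow, List.length_map, PySem.List.length_pyRange_one]
      simp
  refine ⟨∅, [], hshape, ?_, ?_, ?_, ?_, ?_, ?_, List.Pairwise.nil, ?_, ?_, ?_⟩
  · rintro ⟨a, b⟩ ⟨w1, w2, w3, w4⟩
    rw [pvVisGet_eq n m _ a b hshape w1 w2 w3 w4]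
    constructor
    · intro h
      exfalso
      revert h
      rw [List.getElem_map]
      rw [List.getD_eq_getElem _ _ (by
        rw [List.length_map, PySem.List.length_pyRange_one]
        omega)]
      rw [List.getElem_map]
      simp
    · intro h
      exact absurd h (Finset.notMem_empty _)
  · intro c hc
    exact absurd hc (Finset.notMem_empty _)
  · intro c hc
    exact absurd hc (Finset.notMem_empty _)
  · intro c hco hp
    exfalso
    obtain ⟨⟨_, _, h3, _⟩, _⟩ := hco
    omega
  · intro r hr
    cases hr
  · intro r hr
    cases hr
  · intro c hc
    exact absurd hc (Finset.notMem_empty _)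
  · rw [List.length_map, PySem.List.length_pyRange_one]
    simp
  · intro k hk
    rw [List.getD_eq_getElem _ _ (by
      rw [List.length_map, PySem.List.length_pyRange_one]
      omega)]
    rw [List.getElem_map]
    simp

theorem pvA_char (land : List (List Int)) (n m : Int) (hn : 0 ≤ n) (hm : 0 ≤ m) :
    ∃ reps : List (Int × Int), pvGoodReps land n m reps ∧
      (((PySem.List.pyRange 0 m 1).foldl (fun st y =>
          (PySem.List.pyRange 0 n 1).foldl
            (fun (st : List (List Bool) × List Int) x =>
              if pvVisGet st.1 x y = true then st
              else if cellD land x y = 0 then st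
              else pvBfs land n m st.1 st.2 (x, y)) st)
        ((PySem.List.pyRange 0 n 1).map
          (fun _ => (PySem.List.pyRange 0 m 1).map (fun _ => false)),
         (PySem.List.pyRange 0 m 1).map (fun _ => (0 : Int)))).2).length = m.toNat ∧
      ∀ k : Nat, k < m.toNat →
        (((PySem.List.pyRange 0 m 1).foldl (fun st y =>
            (PySem.List.pyRange 0 n 1).foldl
              (fun (st : List (List Bool) × List Int) x =>
                if pvVisGet st.1 x y = true then st
                else if cellD land x y = 0 then st
                else pvBfs land n m st.1 st.2 (x, y)) st)
          ((PySem.List.pyRange 0 n 1).map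
            (fun _ => (PySem.List.pyRange 0 m 1).map (fun _ => false)),
           (PySem.List.pyRange 0 m 1).map (fun _ => (0 : Int)))).2).getD k 0 =
          (reps.map (fun r => gF (compF land n m r) (k : Int))).sum := by
  have main := pvRangeInd
    (fun st y => (PySem.List.pyRange 0 n 1).foldl
      (fun (st : List (List Bool) × List Int) x =>
        if pvVisGet st.1 x y = true then st
        else if cellD land x y = 0 then st
        else pvBfs land n m st.1 st.2 (x, y)) st)
    (fun y st => pvAInv land n m (fun c => c.2 < y) st)
    0 m
    (by
      intro Y st hY hYm hQ
      have inner := pvRangeInd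
        (fun (st : List (List Bool) × List Int) x =>
          if pvVisGet st.1 x Y = true then st
          else if cellD land x Y = 0 then st
          else pvBfs land n m st.1 st.2 (x, Y))
        (fun x st => pvAInv land n m
          (fun c => c.2 < Y ∨ (c.2 = Y ∧ c.1 < x)) st)
        0 n
        (by
          intro x st hx hxn hQ'
          have step := pvAStep land n m _ st x Y hx hxn hY hYm hQ'
          refine pvAInv_congr land n m _ _ ?_ _ step
          intro c _
          constructor
          · rintro ((h | ⟨h1, h2⟩) | rfl)
            · exact Or.inl h
            · exact Or.inr ⟨h1, by omega⟩
            · exact Or.inr ⟨rfl, by omega⟩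
          · rintro (h | ⟨h1, h2⟩)
            · exact Or.inl (Or.inl h)
            · by_cases hcx : c.1 = x
              · exact Or.inr (Prod.ext hcx h1)
              · exact Or.inl (Or.inr ⟨h1, by omega⟩))
        n.toNat 0 st (le_refl 0) hn (by omega)
        (by
          refine pvAInv_congr land n m _ _ ?_ _ hQ
          intro c hc
          constructor
          · exact fun h => Or.inl h
          · rintro (h | ⟨_, h2⟩)
            · exact h
            · exfalso
              obtain ⟨⟨h1, _, _, _⟩, _⟩ := hc
              omega)
      refine pvAInv_congr land n m _ _ ?_ _ inner
      intro c hc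
      obtain ⟨⟨g1, g2, g3, g4⟩, g5⟩ := hc
      constructor
      · rintro (h | ⟨h1, _⟩)
        · omega
        · omega
      · intro h
        by_cases hcy : c.2 = Y
        · exact Or.inr ⟨hcy, g2⟩
        · exact Or.inl (by omega))
    m.toNat 0 _ (le_refl 0) hm (by omega) (pvA_init land n m)
  obtain ⟨VisS, reps, a1, a2, a3, a4, a5, a6, a7, a8, a9, a10, a11⟩ := main
  refine ⟨reps, ⟨a6, a8, ?_⟩, a10, a11⟩
  intro c hco
  have hcV : c ∈ VisS := by
    refine a5 c hco ?_
    obtain ⟨⟨_, _, _, h4⟩, _⟩ := hco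
    exact h4
  exact a9 c hcV

theorem pv_solution_eq (land : List (List Int)) :
    solution land = solution_alt land := by
  have hn : (0 : Int) ≤ PySem.List.len land := by
    rw [PySem.List.len_eq]
    exact Int.natCast_nonneg _
  have hm : (0 : Int) ≤ PySem.List.len (PySem.List.pyGetD land 0 []) := by
    rw [PySem.List.len_eq]
    exact Int.natCast_nonneg _
  obtain ⟨repsA, hgoodA, hlenA, hvalA⟩ := pvA_char land _ _ hn hm
  obtain ⟨repsB, hgoodB, hvalB⟩ := pvB_char land _ _ hn hm
  refine congrArg (fun l => (PySem.List.max? l (fun v => v)).getD 0) ?_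
  apply List.ext_getElem
  · rw [hlenA, List.length_map, PySem.List.length_pyRange_one]
    simp
  · intro k h1 h2
    rw [List.getElem_map, ← List.getD_eq_getElem _ 0 h1,
      hvalA k (by rw [hlenA] at h1; exact h1), PySem.List.getElem_pyRange_one,
      hvalB]
    norm_num
    exact pvGoodReps_sum_eq land _ _ repsA repsB hgoodA hgoodB
      (fun C => gF C (k : Int))

-- ===== VERDICT =====
theorem solution_spec : Claim_equal_solution := by
  intro land _hdom _hpre
  unfold Spec_solution
  exact pv_solution_eq land
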